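-- pv_equiv track=rewrite | github.com/McSinyx/cp | codechef/chefrail.py | rail
-- ===== SOURCE A (Python) =====
-- from itertools import count, takewhile
-- from typing import Iterator, Set
--
-- def binary(i: int, h: int) -> Iterator[int]:
--     while h % i == 0:
--         yield i
--         i <<= 1
--
-- def rail(x: Set[int], y: Set[int]) -> int:
--     result = 0
--     for h in map(abs, x):
--         result += -h in y and h in y
--         if h < 2: continue
--
--         k, z = h, list(takewhile(lambda j: j < h, binary(1, h*h)))
--         while k % 2 == 0: k >>= 1
--         for i in takewhile(lambda j: j*j <= k, count(3, 2)):
--             start, stop = 0, len(z)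
--             while k % i == 0:
--                 k //= i
--                 z.extend(i*j for j in z[start:stop] if i*j < h)
--                 start, stop = stop, len(z)
--                 z.extend(i*j for j in z[start:stop] if i*j < h)
--                 start, stop = stop, len(z)
--         if k > 1:
--             start, stop = 0, len(z)
--             z.extend(k*j for j in z[start:stop] if k*j < h)
--             start, stop = stop, len(z)
--             z.extend(k*j for j in z[start:stop] if k*j < h)
--
--         for i in z:
--             j = h * h // i
--             result += (-i in y and j in y) + (i in y and -j in y)
--     return result
-- ===== SOURCE B (Python) =====
-- def _primes_upto(r):
--     """Ascending list of all primes < r, each candidate tested against the primes found so far."""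
--     primes = []
--     for n in range(2, r):
--         is_p = True
--         for p in primes:
--             if p * p > n:
--                 break
--             if n % p == 0:
--                 is_p = False
--                 break
--         if is_p:
--             primes.append(n)
--     return primes
--
--
-- def _count(fac, idx, d, hh, ys):
--     """Sum of [-t in ys and hh//t in ys] over all divisors t = d * (product of remaining prime powers)."""
--     if idx == len(fac):
--         return 1 if (-d in ys and hh // d in ys) else 0
--     p, e = fac[idx]
--     t = 0
--     for _ in range(2 * e + 1):
--         t += _count(fac, idx + 1, d, hh, ys)
--         d *= p
--     return t
--
--
-- def rail(x, y):
--     ys = set(y)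
--     m = 0
--     for v in x:
--         a = -v if v < 0 else v
--         if a > m:
--             m = a
--     r = 1
--     while r * r <= m:
--         r += 1
--     primes = _primes_upto(r)  # all primes <= isqrt(max |v|)
--     total = 0
--     for v in x:
--         h = -v if v < 0 else v
--         if h == 0:
--             if 0 in ys:
--                 total += 1
--             continue
--         k = h
--         fac = []
--         for p in primes:
--             if p * p > k:
--                 break
--             e = 0
--             while k % p == 0:
--                 k //= p
--                 e += 1
--             if e:
--                 fac.append((p, e))
--         if k > 1:
--             fac.append((k, 1))
--         # count symmetrically over ALL divisors t of h*h: pairs (-t, h*h//t) both in y;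
--         # t < h gives A's first term, t > h the second, t == h the middle +-h pair.
--         total += _count(fac, 0, 1, h * h, ys)
--     return total
-- ===== Notes on version B (the rewrite author's own statement) =====
-- stated objective: alternative
-- what changed: A factors each |v| by halving plus trial division by every odd candidate while growing the list of divisors of h^2 below h in place through sliding slice windows, counting two sign-patterns per small divisor; B sieves the primes up to isqrt(max|v|) once (each candidate tested only against earlier primes), factors each h by dividing only by those primes, and counts a single sign-pattern [-d in y and h^2//d in y] symmetrically over ALL divisors of h^2 generated by a recursion over the factorization (the d<h, d=h, d>h divisors reproduce A's three kinds of terms).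
import Mathlib
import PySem

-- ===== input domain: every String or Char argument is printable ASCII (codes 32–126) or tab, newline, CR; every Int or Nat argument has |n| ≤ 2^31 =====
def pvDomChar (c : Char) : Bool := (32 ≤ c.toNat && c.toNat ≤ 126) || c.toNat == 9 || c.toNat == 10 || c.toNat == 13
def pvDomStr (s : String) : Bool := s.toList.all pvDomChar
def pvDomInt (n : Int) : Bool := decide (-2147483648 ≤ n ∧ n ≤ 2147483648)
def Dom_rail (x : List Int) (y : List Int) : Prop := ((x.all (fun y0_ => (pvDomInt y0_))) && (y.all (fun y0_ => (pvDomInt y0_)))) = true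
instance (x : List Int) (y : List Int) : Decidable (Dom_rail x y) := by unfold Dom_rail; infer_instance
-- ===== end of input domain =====

-- B sieves the primes up to isqrt(max|v|) once, factors each h by those primes only, and counts
-- one sign-pattern symmetrically over ALL divisors of h^2 via a recursion over the factorization;
-- A trial-divides by every odd candidate while growing the below-h divisor list through slice
-- windows and counts two sign-patterns per small divisor.  Objective: alternative.
-- In loop guards below, extra conjuncts `0 < i`, `1 ≤ k`, `2 ≤ i` are totality guards only: they
-- hold at every call the Python programs make, so behaviour is unchanged.

-- ===== PORT A =====

-- generator expression `(i*j for j in w if i*j < hlim)`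
def railExt (hlim i : Int) (w : List Int) : List Int :=
  w.filterMap (fun j => if i * j < hlim then some (i * j) else none)

-- `list(takewhile(lambda j: j < h, binary(1, h*h)))` : pull from `binary` (yield i while hh % i == 0,
-- doubling i) while the pulled value is < hlim
def railPow2 (hh hlim i : Int) : List Int :=
  if 0 < i ∧ PySem.Int.mod hh i = 0 ∧ i < hlim then
    i :: railPow2 hh hlim (i * 2)
  else []
termination_by (hlim - i).toNat
decreasing_by omega

-- `while k % 2 == 0: k >>= 1`
def railOdd (k : Int) : Int :=
  if h : 0 < k ∧ PySem.Int.mod k 2 = 0 then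
    railOdd (PySem.Int.floordiv k 2)
  else k
termination_by k.toNat
decreasing_by
  rw [PySem.Int.floordiv_eq_ediv_of_pos (by omega : (0:Int) < 2)]; omega

-- the division q = k // i, with the facts the termination proofs need
theorem railDiv_lt {k i : Int} (hk : 1 ≤ k) (hi : 2 ≤ i) (hm : PySem.Int.mod k i = 0) :
    1 ≤ PySem.Int.floordiv k i ∧ PySem.Int.floordiv k i < k := by
  rw [PySem.Int.floordiv_eq_ediv_of_pos (by omega : 0 < i)]
  have hd : i ∣ k := (PySem.Int.mod_eq_zero_iff_dvd k i).1 hm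
  obtain ⟨q, hq⟩ := hd
  have hq' : k / i = q := by rw [hq]; exact Int.mul_ediv_cancel_left q (by omega)
  rw [hq']
  constructor
  · nlinarith
  · nlinarith

-- `while k % i == 0: k //= i; z.extend(...); start, stop = stop, len(z); z.extend(...); start, stop = stop, len(z)`
def railInner (hlim i k : Int) (z : List Int) (start stop : Int) : Int × List Int :=
  if h : 1 ≤ k ∧ 2 ≤ i ∧ PySem.Int.mod k i = 0 then
    let k' := PySem.Int.floordiv k i
    let z1 := z ++ railExt hlim i (PySem.List.slice z (some start) (some stop))
    let start1 := stop
    let stop1 := (z1.length : Int)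
    let z2 := z1 ++ railExt hlim i (PySem.List.slice z1 (some start1) (some stop1))
    railInner hlim i k' z2 stop1 (z2.length : Int)
  else (k, z)
termination_by k.toNat
decreasing_by
  have := railDiv_lt h.1 h.2.1 h.2.2; omega

theorem railInner_fst_le (hlim i k : Int) (z : List Int) (start stop : Int) :
    (railInner hlim i k z start stop).1 ≤ k := by
  fun_induction railInner with
  | case1 k z start stop h k' z1 start1 stop1 z2 ih =>
    have := railDiv_lt h.1 h.2.1 h.2.2; omega
  | case2 => simp

-- `for i in takewhile(lambda j: j*j <= k, count(3, 2)): start, stop = 0, len(z); <inner while>`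
def railOuter (hlim i k : Int) (z : List Int) : Int × List Int :=
  if h : 3 ≤ i ∧ i * i ≤ k then
    let r := railInner hlim i k z 0 (z.length : Int)
    railOuter hlim (i + 2) r.1 r.2
  else (k, z)
termination_by (k - i).toNat
decreasing_by
  have h1 : i + i ≤ i * i := by nlinarith
  have h2 := railInner_fst_le hlim i k z 0 (z.length : Int)
  omega

-- one iteration of `for h in map(abs, x)` with accumulator `result`
def railBody (y : List Int) (result v : Int) : Int :=
  let h := |v|
  let r1 := result + (if -h ∈ y ∧ h ∈ y then 1 else 0)
  if h < 2 then r1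
  else
    let z := railPow2 (h * h) h 1
    let k := railOdd h
    let p := railOuter h 3 k z
    let k2 := p.1
    let z2 := p.2
    let z3 :=
      if 1 < k2 then
        let z2a := z2 ++ railExt h k2 (PySem.List.slice z2 (some 0) (some (z2.length : Int)))
        z2a ++ railExt h k2 (PySem.List.slice z2a (some (z2.length : Int)) (some (z2a.length : Int)))
      else z2
    z3.foldl (fun result i =>
      let j := PySem.Int.floordiv (h * h) i
      result + ((if -i ∈ y ∧ j ∈ y then 1 else 0) + (if i ∈ y ∧ -j ∈ y then 1 else 0))) r1

def rail (x : List Int) (y : List Int) : Int := x.foldl (railBody y) 0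

-- ===== PORT B =====

-- inner scan of `_primes_upto`: `for p in primes: if p*p > n: break; if n % p == 0: is_p=False; break`
def railPrimesInner (n : Int) : List Int → Bool
  | [] => true
  | p :: rest =>
      if p * p > n then true
      else if PySem.Int.mod n p = 0 then false
      else railPrimesInner n rest

-- `_primes_upto(r)`: grow the prime list over range(2, r)
def railPrimesLoop (r : Int) : List Int :=
  (PySem.List.pyRange 2 r 1).foldl
    (fun primes n => if railPrimesInner n primes then primes ++ [n] else primes) []

-- `m = 0; for v in x: a = -v if v < 0 else v; if a > m: m = a`
def railMax (x : List Int) : Int :=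
  x.foldl (fun m v => let a := if v < 0 then -v else v; if a > m then a else m) 0

-- `r = 1; while r * r <= m: r += 1`
def railR (m r : Int) : Int :=
  if h : r * r ≤ m ∧ 1 ≤ r then railR m (r + 1) else r
termination_by (m + 1 - r).toNat
decreasing_by
  have : r ≤ m := by nlinarith
  omega

-- `e = 0; while k % p == 0: k //= p; e += 1`
def railAltCount (k i e : Int) : Int × Int :=
  if h : 1 ≤ k ∧ 2 ≤ i ∧ PySem.Int.mod k i = 0 then
    railAltCount (PySem.Int.floordiv k i) i (e + 1)
  else (k, e)
termination_by k.toNat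
decreasing_by
  have := railDiv_lt h.1 h.2.1 h.2.2; omega

-- `for p in primes: if p*p > k: break; e = <count>; if e: fac.append((p, e))`
def railFacP (primes : List Int) (k : Int) (fac : List (Int × Int)) : Int × List (Int × Int) :=
  match primes with
  | [] => (k, fac)
  | p :: rest =>
      if p * p > k then (k, fac)
      else
        let r := railAltCount k p 0
        railFacP rest r.1 (if r.2 ≠ 0 then fac ++ [(p, r.2)] else fac)

-- `_count(fac, idx, d, hh, ys)`, recursion over the factor list; the inner
-- `for _ in range(2*e+1): t += _count(...); d *= p` carries the pair (t, d)
def railDfs (ys : List Int) (hh : Int) : List (Int × Int) → Int → Int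
  | [], d => if -d ∈ ys ∧ PySem.Int.floordiv hh d ∈ ys then 1 else 0
  | (p, e) :: rest, d =>
      ((PySem.List.pyRange 0 (2 * e + 1) 1).foldl
        (fun (td : Int × Int) _ => (td.1 + railDfs ys hh rest td.2, td.2 * p)) (0, d)).1

-- one iteration of `for v in x` with accumulator `total`
def railAltBody (ys primes : List Int) (total v : Int) : Int :=
  let h := if v < 0 then -v else v
  if h = 0 then total + (if (0:Int) ∈ ys then 1 else 0)
  else
    let fp := railFacP primes h []
    let fac := if 1 < fp.1 then fp.2 ++ [(fp.1, 1)] else fp.2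
    total + railDfs ys (h * h) fac 1

def rail_alt (x : List Int) (y : List Int) : Int :=
  let ys := PySem.Set.ofList y
  let m := railMax x
  let r := railR m 1
  let primes := railPrimesLoop r
  x.foldl (railAltBody ys primes) 0

-- ===== PRECONDITION & SPEC =====
def Spec_rail (x : List Int) (y : List Int) (out : Int) : Prop := out = rail_alt x y
instance (x : List Int) (y : List Int) (out : Int) : Decidable (Spec_rail x y out) := by unfold Spec_rail; infer_instance

-- ===== CLAIM (what is proved, stated in full; the proofs are below) =====
def Claim_equal_rail : Prop := ∀ (x : List Int) (y : List Int), Dom_rail x y → Spec_rail x y (rail x y)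

-- ===== LEMMAS AND PROOFS =====

-- ---- Stage 1: A's windowed divisor growing equals factorize-then-enumerate (railAltBodyOld) ----

-- `[d * p**j for d in divs for j in range(2*e+1) if d * p**j < h]` (proof-layer intermediate)
def railAltStep (hlim : Int) (divs : List Int) (pe : Int × Int) : List Int :=
  divs.flatMap (fun d =>
    (PySem.List.pyRange 0 (2 * pe.2 + 1) 1).filterMap
      (fun j => if d * pe.1 ^ j.toNat < hlim then some (d * pe.1 ^ j.toNat) else none))

def railAltHalve (k e : Int) : Int × Int :=
  if h : 0 < k ∧ PySem.Int.mod k 2 = 0 then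
    railAltHalve (PySem.Int.floordiv k 2) (e + 1)
  else (k, e)
termination_by k.toNat
decreasing_by
  rw [PySem.Int.floordiv_eq_ediv_of_pos (by omega : (0:Int) < 2)]; omega

theorem railAltCount_fst_le (k i e : Int) : (railAltCount k i e).1 ≤ k := by
  fun_induction railAltCount with
  | case1 k e h ih => have := railDiv_lt h.1 h.2.1 h.2.2; omega
  | case2 => simp

def railAltFacLoop (i k : Int) (fac : List (Int × Int)) : Int × List (Int × Int) :=
  if h : 3 ≤ i ∧ i * i ≤ k then
    let r := railAltCount k i 0
    let fac' := if r.2 ≠ 0 then fac ++ [(i, r.2)] else fac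
    railAltFacLoop (i + 2) r.1 fac'
  else (k, fac)
termination_by (k - i).toNat
decreasing_by
  have h1 : i + i ≤ i * i := by nlinarith
  have h2 := railAltCount_fst_le k i 0
  omega

-- per-element form of the old factorize-then-enumerate computation
def railAltBodyOld (ys : List Int) (total v : Int) : Int :=
  let h := |v|
  let t1 := total + (if -h ∈ ys ∧ h ∈ ys then 1 else 0)
  if h < 2 then t1
  else
    let r2 := railAltHalve h 0
    let k := r2.1
    let e2 := r2.2
    let fac : List (Int × Int) := if e2 ≠ 0 then [(2, e2)] else []
    let r3 := railAltFacLoop 3 k fac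
    let k3 := r3.1
    let fac2 := if 1 < k3 then r3.2 ++ [(k3, 1)] else r3.2
    let divs := fac2.foldl (railAltStep h) [1]
    let hh := h * h
    divs.foldl (fun total d =>
      let q := PySem.Int.floordiv hh d
      let t := total + (if -d ∈ ys ∧ q ∈ ys then 1 else 0)
      t + (if d ∈ ys ∧ -q ∈ ys then 1 else 0)) t1

-- `pws hlim p n d` = the divisors d*p^0 … d*p^n kept below hlim, in order
def pws (hlim p : Int) : Nat → Int → List Int
  | 0, d => if d < hlim then [d] else []
  | n + 1, d => (if d < hlim then [d] else []) ++ pws hlim p n (d * p)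

theorem pws_nil (hlim p : Int) (n : Nat) (d : Int) (hp : 1 ≤ p) (hd : 0 ≤ d)
    (hge : hlim ≤ d) : pws hlim p n d = [] := by
  induction n generalizing d with
  | zero => simp [pws]; omega
  | succ n ih =>
    have hdp : hlim ≤ d * p := le_trans hge (le_mul_of_one_le_right hd hp)
    simp [pws, ih (d * p) (by positivity) hdp]; omega

theorem pws_mem_bounds (hlim p : Int) (n : Nat) (d : Int) (hp : 1 ≤ p) (hd : 1 ≤ d) :
    ∀ a ∈ pws hlim p n d, 1 ≤ a ∧ a < hlim := by
  induction n generalizing d with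
  | zero =>
    intro a ha
    simp [pws] at ha
    rcases ha with ⟨h1, h2⟩
    omega
  | succ n ih =>
    intro a ha
    simp only [pws, List.mem_append] at ha
    rcases ha with ha | ha
    · split at ha <;> simp at ha; omega
    · exact ih (d * p) (by nlinarith) a ha

theorem flatMap_pws_zero (hlim p : Int) (w : List Int) (hw : ∀ d ∈ w, d < hlim) :
    w.flatMap (pws hlim p 0) = w := by
  induction w with
  | nil => rfl
  | cons d w ih =>
    simp only [List.flatMap_cons]
    rw [ih (fun a ha => hw a (by simp [ha]))]
    simp [pws, hw d (by simp)]

theorem railExt_bounds (hlim p : Int) (w : List Int) (hp : 1 ≤ p)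
    (hw : ∀ d ∈ w, 1 ≤ d ∧ d < hlim) : ∀ a ∈ railExt hlim p w, 1 ≤ a ∧ a < hlim := by
  intro a ha
  simp only [railExt, List.mem_filterMap] at ha
  obtain ⟨j, hj, hcond⟩ := ha
  split at hcond
  · rename_i hlt
    simp only [Option.some.injEq] at hcond
    subst hcond
    have := hw j hj
    exact ⟨by nlinarith [this.1], hlt⟩
  · simp at hcond

theorem railExt_cons (hlim p d : Int) (w : List Int) :
    railExt hlim p (d :: w)
      = if p * d < hlim then p * d :: railExt hlim p w else railExt hlim p w := by
  unfold railExt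
  rw [List.filterMap_cons]
  by_cases hd : p * d < hlim <;> simp [hd]

-- the key shuffle: A's two windowed extensions followed by per-element tails
-- are a permutation of B's per-element enumeration two levels deeper
theorem chain_perm (hlim p : Int) (hp : 1 ≤ p) (n : Nat) :
    ∀ w : List Int, (∀ d ∈ w, 1 ≤ d ∧ d < hlim) →
      (w ++ railExt hlim p w ++ (railExt hlim p (railExt hlim p w)).flatMap (pws hlim p n)).Perm
        (w.flatMap (pws hlim p (n + 2))) := by
  intro w
  rw [← Multiset.coe_eq_coe]
  induction w with
  | nil => intro _; simp [railExt]
  | cons d w ih =>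
    intro hw
    have hd := hw d (by simp)
    have hw' : ∀ a ∈ w, 1 ≤ a ∧ a < hlim := fun a ha => hw a (by simp [ha])
    have ihw := ih hw'
    simp only [← Multiset.coe_add, ← Multiset.cons_coe] at ihw
    rw [railExt_cons]
    by_cases h1 : p * d < hlim
    · rw [if_pos h1, railExt_cons]
      have hpws2 : pws hlim p (n + 2) d = [d] ++ [d * p] ++ pws hlim p n (d * p * p) := by
        show pws hlim p (n + 1 + 1) d = _
        rw [pws, pws, if_pos hd.2, if_pos (by rw [mul_comm]; exact h1)]
        simp
      by_cases h2 : p * (p * d) < hlim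
      · rw [if_pos h2]
        simp only [List.flatMap_cons, hpws2, ← Multiset.coe_add, ← Multiset.cons_coe]
        rw [← ihw]
        have hco2 : d * p * p = p * (p * d) := by ring
        have hco : d * p = p * d := by ring
        rw [hco2, hco]
        simp only [← Multiset.singleton_add, Multiset.coe_nil]
        abel
      · rw [if_neg h2]
        have hz : pws hlim p n (d * p * p) = [] :=
          pws_nil hlim p n (d * p * p) hp (by nlinarith [hd.1])
            (by rw [show d * p * p = p * (p * d) from by ring]; omega)
        simp only [List.flatMap_cons, hpws2, hz, ← Multiset.coe_add, ← Multiset.cons_coe]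
        rw [← ihw]
        have hco : d * p = p * d := by ring
        rw [hco]
        simp only [← Multiset.singleton_add, Multiset.coe_nil]
        abel
    · rw [if_neg h1]
      have hpws2 : pws hlim p (n + 2) d = [d] := by
        show pws hlim p (n + 1 + 1) d = _
        rw [pws, if_pos hd.2,
          pws_nil hlim p (n + 1) (d * p) hp (by nlinarith [hd.1])
            (by rw [show d * p = p * d from by ring]; omega)]
        simp
      simp only [List.flatMap_cons, hpws2, ← Multiset.coe_add, ← Multiset.cons_coe]
      rw [← ihw]
      simp only [← Multiset.singleton_add, Multiset.coe_nil]
      abel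

theorem filterMap_range_pws (hlim p : Int) (n : Nat) :
    ∀ d : Int, (List.range (n + 1)).filterMap
        (fun j => if d * p ^ j < hlim then some (d * p ^ j) else none) = pws hlim p n d := by
  induction n with
  | zero =>
    intro d
    by_cases hd : d < hlim <;> simp [pws, hd]
  | succ n ih =>
    intro d
    rw [List.range_succ_eq_map, List.filterMap_cons, List.filterMap_map]
    have hfun : ((fun j => if d * p ^ j < hlim then some (d * p ^ j) else none) ∘ Nat.succ)
        = (fun j => if (d * p) * p ^ j < hlim then some ((d * p) * p ^ j) else none) := by
      funext j
      have h : d * p ^ (Nat.succ j) = (d * p) * p ^ j := by rw [pow_succ]; ring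
      simp only [Function.comp_apply, h]
    rw [hfun, ih (d * p)]
    simp only [pws]
    by_cases hd : d < hlim <;> simp [hd]

-- `railAltStep` is flatMap of `pws`
theorem railAltStep_eq (hlim : Int) (divs : List Int) (p e : Int) (he : 0 ≤ e) :
    railAltStep hlim divs (p, e) = divs.flatMap (pws hlim p (2 * e).toNat) := by
  unfold railAltStep
  congr 1
  funext d
  have h1 : (2 * e + 1 : Int) = ((2 * e.toNat + 1 : Nat) : Int) := by push_cast; omega
  rw [h1, PySem.List.pyRange_zero_natCast, List.filterMap_map]
  have h2 : (2 * e).toNat = 2 * e.toNat := by omega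
  rw [h2, ← filterMap_range_pws hlim p (2 * e.toNat) d]
  congr 1

-- counting loop: accumulator shift, sign, positivity
theorem railAltCount_shift (k i e : Int) :
    railAltCount k i e = ((railAltCount k i 0).1, e + (railAltCount k i 0).2) := by
  induction hN : k.toNat using Nat.strong_induction_on generalizing k e with
  | _ N ih =>
  subst hN
  by_cases hg : 1 ≤ k ∧ 2 ≤ i ∧ PySem.Int.mod k i = 0
  · have hlt := railDiv_lt hg.1 hg.2.1 hg.2.2
    have hL : ∀ e : Int, railAltCount k i e = railAltCount (PySem.Int.floordiv k i) i (e + 1) := by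
      intro e; rw [railAltCount]; rw [dif_pos hg]
    rw [hL e, hL 0, ih _ (by omega) _ (e + 1) rfl, ih _ (by omega) _ (0 + 1) rfl]
    simp [Prod.ext_iff]; ring
  · have h0 : railAltCount k i 0 = (k, 0) := by rw [railAltCount, dif_neg hg]
    rw [railAltCount, dif_neg hg, h0]; simp

theorem railAltCount_snd_nonneg (k i : Int) : 0 ≤ (railAltCount k i 0).2 := by
  induction hN : k.toNat using Nat.strong_induction_on generalizing k with
  | _ N ih =>
  subst hN
  by_cases hg : 1 ≤ k ∧ 2 ≤ i ∧ PySem.Int.mod k i = 0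
  · have hlt := railDiv_lt hg.1 hg.2.1 hg.2.2
    rw [railAltCount, dif_pos hg, railAltCount_shift]
    have := ih (PySem.Int.floordiv k i).toNat (by omega) _ rfl
    simp; omega
  · rw [railAltCount, dif_neg hg]

theorem railAltCount_fst_pos (k i e : Int) (hk : 1 ≤ k) : 1 ≤ (railAltCount k i e).1 := by
  induction hN : k.toNat using Nat.strong_induction_on generalizing k e with
  | _ N ih =>
  subst hN
  by_cases hg : 1 ≤ k ∧ 2 ≤ i ∧ PySem.Int.mod k i = 0
  · have hlt := railDiv_lt hg.1 hg.2.1 hg.2.2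
    rw [railAltCount, dif_pos hg]
    exact ih _ (by omega) _ (e + 1) hlt.1 rfl
  · rw [railAltCount, dif_neg hg]; simpa

-- A's inner division loop agrees with B's counting loop
theorem railInner_fst_eq (hlim i k : Int) (z : List Int) (start stop e : Int) :
    (railInner hlim i k z start stop).1 = (railAltCount k i e).1 := by
  induction hN : k.toNat using Nat.strong_induction_on generalizing k z start stop e with
  | _ N ih =>
  subst hN
  by_cases hg : 1 ≤ k ∧ 2 ≤ i ∧ PySem.Int.mod k i = 0
  · have hlt := railDiv_lt hg.1 hg.2.1 hg.2.2
    rw [railInner, dif_pos hg, railAltCount, dif_pos hg]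
    exact ih _ (by omega) _ _ _ _ (e + 1) rfl
  · rw [railInner, dif_neg hg, railAltCount, dif_neg hg]

-- halving loop spec
theorem railAltHalve_spec (k e : Int) (hk : 0 < k) :
    0 < (railAltHalve k e).1 ∧ PySem.Int.mod ((railAltHalve k e).1) 2 = 1 ∧
      e ≤ (railAltHalve k e).2 ∧ k = 2 ^ (((railAltHalve k e).2 - e).toNat) * (railAltHalve k e).1 := by
  induction hN : k.toNat using Nat.strong_induction_on generalizing k e with
  | _ N ih =>
  subst hN
  by_cases hg : 0 < k ∧ PySem.Int.mod k 2 = 0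
  · have hmod : PySem.Int.mod k 2 = k % 2 := PySem.Int.mod_eq_emod_of_pos (by omega)
    have hdiv : PySem.Int.floordiv k 2 = k / 2 := PySem.Int.floordiv_eq_ediv_of_pos (by omega)
    have hm0 : k % 2 = 0 := by rw [← hmod]; exact hg.2
    rw [railAltHalve, dif_pos hg]
    have hpos : 0 < k / 2 := by omega
    have hrec := ih (k / 2).toNat (by omega) (k / 2) (e + 1) hpos rfl
    rw [hdiv]
    refine ⟨hrec.1, hrec.2.1, by omega, ?_⟩
    have he1 : e + 1 ≤ (railAltHalve (k / 2) (e + 1)).2 := hrec.2.2.1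
    have hexp : (((railAltHalve (k / 2) (e + 1)).2 - e).toNat)
        = (((railAltHalve (k / 2) (e + 1)).2 - (e + 1)).toNat) + 1 := by omega
    rw [hexp, pow_succ]
    have hk2 : k = 2 * (k / 2) := by omega
    calc k = 2 * (k / 2) := hk2
      _ = 2 * (2 ^ ((railAltHalve (k / 2) (e + 1)).2 - (e + 1)).toNat * (railAltHalve (k / 2) (e + 1)).1) := by
          rw [← hrec.2.2.2]
      _ = 2 ^ ((railAltHalve (k / 2) (e + 1)).2 - (e + 1)).toNat * 2 * (railAltHalve (k / 2) (e + 1)).1 := by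
          ring
  · rw [railAltHalve, dif_neg hg]
    have hmod : PySem.Int.mod k 2 = k % 2 := PySem.Int.mod_eq_emod_of_pos (by omega)
    have hne : PySem.Int.mod k 2 ≠ 0 := fun hc => hg ⟨hk, hc⟩
    refine ⟨hk, ?_, le_refl e, by simp⟩
    show PySem.Int.mod k 2 = 1
    omega

theorem railOdd_eq_halve_fst (k e : Int) : railOdd k = (railAltHalve k e).1 := by
  induction hN : k.toNat using Nat.strong_induction_on generalizing k e with
  | _ N ih =>
  subst hN
  by_cases hg : 0 < k ∧ PySem.Int.mod k 2 = 0
  · have h2 : PySem.Int.floordiv k 2 = k / 2 := PySem.Int.floordiv_eq_ediv_of_pos (by omega)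
    rw [railOdd, dif_pos hg, railAltHalve, dif_pos hg]
    exact ih _ (by omega) _ (e + 1) rfl
  · rw [railOdd, dif_neg hg, railAltHalve, dif_neg hg]

-- the power-of-two prefix equals pws over the exponent in h
theorem railPow2_eq_pws (h m : Int) (enat : Nat) (hm : 0 < m) (hodd : PySem.Int.mod m 2 = 1)
    (hfac : h = 2 ^ enat * m) (h2 : 2 ≤ h) :
    railPow2 (h * h) h 1 = pws h 2 (2 * enat) 1 := by
  have hm2 : m % 2 = 1 := by rw [← PySem.Int.mod_eq_emod_of_pos (by omega : (0:Int) < 2)]; exact hodd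
  have hhh : h * h = 2 ^ (2 * enat) * (m * m) := by
    rw [hfac]; rw [two_mul, pow_add]; ring
  have hdvd : ∀ t : Nat, t ≤ 2 * enat → PySem.Int.mod (h * h) ((2:Int) ^ t) = 0 := by
    intro t ht
    rw [PySem.Int.mod_eq_zero_iff_dvd, hhh]
    exact dvd_mul_of_dvd_left (pow_dvd_pow 2 ht) _
  have hnod : ¬ PySem.Int.mod (h * h) ((2:Int) ^ (2 * enat + 1)) = 0 := by
    rw [PySem.Int.mod_eq_zero_iff_dvd, hhh]
    intro hdd
    rw [pow_succ] at hdd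
    have h2e : ((2:Int) ^ (2 * enat)) ≠ 0 := by positivity
    have hdm : (2:Int) ∣ m * m := by
      have := (mul_dvd_mul_iff_left h2e).mp hdd
      exact this
    have : (2:Int) ∣ m := by
      rcases Int.prime_two.2.2 m m hdm with hc | hc <;> exact hc
    omega
  have gen : ∀ (c t : Nat), 2 * enat - t = c → t ≤ 2 * enat →
      railPow2 (h * h) h ((2:Int) ^ t) = pws h 2 (2 * enat - t) ((2:Int) ^ t) := by
    intro c
    induction c with
    | zero =>
      intro t hc ht
      have ht' : t = 2 * enat := by omega
      subst ht'
      have hstop : railPow2 (h * h) h ((2:Int) ^ (2 * enat) * 2) = [] := by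
        rw [railPow2, if_neg]
        rintro ⟨-, hdd, -⟩
        rw [show (2:Int) ^ (2 * enat) * 2 = 2 ^ (2 * enat + 1) from (pow_succ 2 (2 * enat)).symm] at hdd
        exact hnod hdd
      rw [railPow2]
      by_cases hlt : (2:Int) ^ (2 * enat) < h
      · rw [if_pos ⟨by positivity, hdvd _ le_rfl, hlt⟩, hstop, hc]
        simp [pws, hlt]
      · rw [if_neg (by tauto), hc]
        rw [pws_nil h 2 0 _ (by omega) (by positivity) (by omega)]
    | succ c ihc =>
      intro t hc ht
      have htlt : t < 2 * enat := by omega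
      rw [railPow2]
      by_cases hlt : (2:Int) ^ t < h
      · rw [if_pos ⟨by positivity, hdvd _ (by omega), hlt⟩]
        have h21 : (2:Int) ^ t * 2 = (2:Int) ^ (t + 1) := by rw [pow_succ]
        rw [h21, ihc (t + 1) (by omega) (by omega)]
        have hidx : 2 * enat - t = (2 * enat - (t + 1)) + 1 := by omega
        rw [hidx]
        simp only [pws, if_pos hlt]
        rw [← h21]
        simp
      · rw [if_neg (by tauto)]
        rw [pws_nil h 2 _ _ (by omega) (by positivity) (by omega)]
  have := gen (2 * enat) 0 (by omega) (by omega)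
  simpa using this

-- fac-loop with a suffix accumulator
theorem railAltFacLoop_shift (N : Nat) (i k : Int) (hN : (k - i).toNat = N) (fac : List (Int × Int)) :
    railAltFacLoop i k fac
      = ((railAltFacLoop i k []).1, fac ++ (railAltFacLoop i k []).2) := by
  induction N using Nat.strong_induction_on generalizing i k fac with
  | _ N ih =>
  by_cases hg : 3 ≤ i ∧ i * i ≤ k
  · have hle := railAltCount_fst_le k i 0
    have hii : i + i ≤ i * i := by nlinarith
    have hL : ∀ fac : List (Int × Int), railAltFacLoop i k fac
        = railAltFacLoop (i + 2) (railAltCount k i 0).1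
            (if (railAltCount k i 0).2 ≠ 0 then fac ++ [(i, (railAltCount k i 0).2)] else fac) := by
      intro fac; rw [railAltFacLoop, dif_pos hg]
    have hdec : ((railAltCount k i 0).1 - (i + 2)).toNat < N := by omega
    rw [hL fac, hL [],
      ih _ hdec _ _ rfl (if (railAltCount k i 0).2 ≠ 0 then fac ++ [(i, (railAltCount k i 0).2)] else fac),
      ih _ hdec _ _ rfl (if (railAltCount k i 0).2 ≠ 0 then [] ++ [(i, (railAltCount k i 0).2)] else [])]
    split <;> simp
  · have : ∀ fac : List (Int × Int), railAltFacLoop i k fac = (k, fac) := by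
      intro fac; rw [railAltFacLoop, dif_neg hg]
    rw [this fac, this []]; simp

theorem slice_window (z w : List Int) :
    PySem.List.slice (z ++ w) (some (z.length : Int)) (some ((z ++ w).length : Int)) = w := by
  rw [PySem.List.slice_natCast, List.drop_left]
  simp

theorem railInner_perm (hlim p : Int) (hp : 2 ≤ p) :
    ∀ (N : Nat) (k : Int), k.toNat = N → 1 ≤ k → ∀ (z w : List Int),
      (∀ d ∈ w, 1 ≤ d ∧ d < hlim) →
      ((railInner hlim p k (z ++ w) (z.length : Int) ((z ++ w).length : Int)).2).Perm
        (z ++ w.flatMap (pws hlim p (2 * ((railAltCount k p 0).2).toNat))) := by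
  intro N
  induction N using Nat.strong_induction_on with
  | _ N ih =>
  intro k hN hk z w hw
  by_cases hg : 1 ≤ k ∧ 2 ≤ p ∧ PySem.Int.mod k p = 0
  · have hlt := railDiv_lt hg.1 hg.2.1 hg.2.2
    rw [railInner, dif_pos hg, railAltCount, dif_pos hg, railAltCount_shift]
    simp only [slice_window]
    have hwC1 : ∀ a ∈ railExt hlim p w, 1 ≤ a ∧ a < hlim :=
      railExt_bounds hlim p w (by omega) hw
    have hwC2 : ∀ a ∈ railExt hlim p (railExt hlim p w), 1 ≤ a ∧ a < hlim :=
      railExt_bounds hlim p _ (by omega) hwC1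
    have hih := ih (PySem.Int.floordiv k p).toNat (by omega) (PySem.Int.floordiv k p) rfl
      hlt.1 ((z ++ w) ++ railExt hlim p w)
      (railExt hlim p (PySem.List.slice ((z ++ w) ++ railExt hlim p w)
        (some ((z ++ w).length : Int)) (some (((z ++ w) ++ railExt hlim p w).length : Int))))
      (by rw [slice_window]; exact hwC2)
    rw [slice_window] at hih
    refine hih.trans ?_
    set m' := (railAltCount (PySem.Int.floordiv k p) p 0).2 with hm'
    have hm'0 : 0 ≤ m' := railAltCount_snd_nonneg _ _
    have hidx : 2 * ((0 : Int) + 1 + m').toNat = 2 * m'.toNat + 2 := by omega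
    rw [hidx]
    have hchain := chain_perm hlim p (by omega) (2 * m'.toNat) w hw
    have heq : z ++ w ++ railExt hlim p w
          ++ (railExt hlim p (railExt hlim p w)).flatMap (pws hlim p (2 * m'.toNat))
        = z ++ (w ++ railExt hlim p w
            ++ (railExt hlim p (railExt hlim p w)).flatMap (pws hlim p (2 * m'.toNat))) := by
      simp [List.append_assoc]
    rw [heq]
    exact List.Perm.append_left z hchain
  · rw [railInner, dif_neg hg, railAltCount, dif_neg hg]
    show (z ++ w).Perm _
    have h0 : (2 * (((k, (0:Int)).2).toNat)) = 0 := by simp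
    rw [h0, flatMap_pws_zero hlim p w (fun d hd => (hw d hd).2)]

-- A's outer trial-division loop agrees with the factor list folded through railAltStep
theorem railOuter_perm (hlim : Int) (hl2 : 2 ≤ hlim) :
    ∀ (N : Nat) (i k : Int), (k - i).toNat = N → 3 ≤ i → 1 ≤ k →
      ∀ (z divs : List Int), z.Perm divs → (∀ d ∈ z, 1 ≤ d ∧ d < hlim) →
        (railOuter hlim i k z).1 = (railAltFacLoop i k []).1 ∧
          ((railOuter hlim i k z).2).Perm
            (((railAltFacLoop i k []).2).foldl (railAltStep hlim) divs) ∧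
          (∀ d ∈ (railOuter hlim i k z).2, 1 ≤ d ∧ d < hlim) := by
  intro N
  induction N using Nat.strong_induction_on with
  | _ N ih =>
  intro i k hN hi hk z divs hzd hz
  by_cases hg : 3 ≤ i ∧ i * i ≤ k
  · have hii : i + i ≤ i * i := by nlinarith
    have he0 : 0 ≤ (railAltCount k i 0).2 := railAltCount_snd_nonneg k i
    have hk' : 1 ≤ (railAltCount k i 0).1 := railAltCount_fst_pos k i 0 hk
    have hkle : (railAltCount k i 0).1 ≤ k := railAltCount_fst_le k i 0
    have hfst : (railInner hlim i k z 0 (z.length : Int)).1 = (railAltCount k i 0).1 :=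
      railInner_fst_eq hlim i k z 0 (z.length : Int) 0
    have hp2 : (2:Int) ≤ i := by omega
    have hr2 := railInner_perm hlim i hp2 k.toNat k rfl hk [] z hz
    simp only [List.nil_append, List.length_nil, Nat.cast_zero] at hr2
    have hinvflat : ∀ a ∈ z.flatMap (pws hlim i (2 * ((railAltCount k i 0).2).toNat)),
        1 ≤ a ∧ a < hlim := by
      intro a ha
      rw [List.mem_flatMap] at ha
      obtain ⟨d, hdz, hpd⟩ := ha
      exact pws_mem_bounds hlim i _ d (by omega) (hz d hdz).1 a hpd
    have hinvr2 : ∀ a ∈ (railInner hlim i k z 0 (z.length : Int)).2, 1 ≤ a ∧ a < hlim :=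
      fun a ha => hinvflat a (hr2.subset ha)
    have hdiv' : ((railInner hlim i k z 0 (z.length : Int)).2).Perm
        (divs.flatMap (pws hlim i (2 * ((railAltCount k i 0).2).toNat))) :=
      hr2.trans (List.Perm.flatMap hzd (fun a _ => List.Perm.refl _))
    have hih := ih ((railAltCount k i 0).1 - (i + 2)).toNat (by omega) (i + 2)
      (railAltCount k i 0).1 rfl (by omega) hk' (railInner hlim i k z 0 (z.length : Int)).2
      (divs.flatMap (pws hlim i (2 * ((railAltCount k i 0).2).toNat))) hdiv' hinvr2
    have hB : railAltFacLoop i k []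
        = railAltFacLoop (i + 2) (railAltCount k i 0).1
            (if (railAltCount k i 0).2 ≠ 0 then ([] : List (Int × Int)) ++ [(i, (railAltCount k i 0).2)]
             else []) := by
      rw [railAltFacLoop, dif_pos hg]
    have hshift := railAltFacLoop_shift ((railAltCount k i 0).1 - (i + 2)).toNat (i + 2)
      (railAltCount k i 0).1 rfl
      (if (railAltCount k i 0).2 ≠ 0 then ([] : List (Int × Int)) ++ [(i, (railAltCount k i 0).2)]
       else [])
    have hfac : (if (railAltCount k i 0).2 ≠ 0 then ([] : List (Int × Int)) ++ [(i, (railAltCount k i 0).2)]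
          else []).foldl (railAltStep hlim) divs
        = divs.flatMap (pws hlim i (2 * ((railAltCount k i 0).2).toNat)) := by
      by_cases he : (railAltCount k i 0).2 = 0
      · rw [if_neg (by simp [he])]
        simp only [List.foldl_nil, he]
        norm_num
        exact (flatMap_pws_zero hlim i divs
          (fun d hd => (hz d (hzd.mem_iff.mpr hd)).2)).symm
      · rw [if_pos he]
        simp only [List.nil_append, List.foldl_cons, List.foldl_nil]
        rw [railAltStep_eq hlim divs i _ he0]
        have ht : ((2:Int) * (railAltCount k i 0).2).toNat
            = 2 * ((railAltCount k i 0).2).toNat := by omega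
        rw [ht]
    rw [railOuter, dif_pos hg]
    simp only [hfst]
    rw [hB, hshift]
    refine ⟨hih.1, ?_, hih.2.2⟩
    rw [List.foldl_append, hfac]
    exact hih.2.1
  · rw [railOuter, dif_neg hg, railAltFacLoop, dif_neg hg]
    exact ⟨rfl, hzd, hz⟩

-- fold of the counting step = starting value + sum of per-element counts
theorem foldl_add_map (g : Int → Int) (l : List Int) (r : Int) :
    l.foldl (fun acc i => acc + g i) r = r + (l.map g).sum := by
  induction l generalizing r with
  | nil => simp
  | cons a l ih => simp [ih, add_assoc]

theorem slice_all (xs : List Int) :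
    PySem.List.slice xs (some 0) (some (xs.length : Int)) = xs := by
  simpa using slice_window [] xs

-- the two final counting folds agree on permuted divisor lists
theorem foldl_count_eq (y : List Int) (hh r : Int) {l1 l2 : List Int} (hp : l1.Perm l2) :
    l1.foldl (fun result i =>
      result + ((if -i ∈ y ∧ PySem.Int.floordiv hh i ∈ y then 1 else 0)
        + (if i ∈ y ∧ -PySem.Int.floordiv hh i ∈ y then 1 else 0))) r
    = l2.foldl (fun total d =>
      (total + (if -d ∈ y ∧ PySem.Int.floordiv hh d ∈ y then 1 else 0))
        + (if d ∈ y ∧ -PySem.Int.floordiv hh d ∈ y then 1 else 0)) r := by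
  have h2 : l2.foldl (fun total d =>
        (total + (if -d ∈ y ∧ PySem.Int.floordiv hh d ∈ y then 1 else 0))
          + (if d ∈ y ∧ -PySem.Int.floordiv hh d ∈ y then 1 else 0)) r
      = l2.foldl (fun total d =>
        total + ((if -d ∈ y ∧ PySem.Int.floordiv hh d ∈ y then 1 else 0)
          + (if d ∈ y ∧ -PySem.Int.floordiv hh d ∈ y then 1 else 0))) r :=
    List.foldl_ext _ _ r (fun a b _ => (add_assoc a _ _))
  rw [h2, foldl_add_map, foldl_add_map]
  congr 1
  exact (hp.map _).sum_eq

-- per-element agreement of A's body with the old factorize-then-enumerate body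
theorem railBody_eq (y : List Int) (result v : Int) :
    railBody y result v = railAltBodyOld (PySem.Set.ofList y) result v := by
  simp only [railBody, railAltBodyOld, PySem.Set.mem_ofList]
  by_cases hv : |v| < 2
  · rw [if_pos hv, if_pos hv]
  · rw [if_neg hv, if_neg hv]
    have habs : (0:Int) ≤ |v| := abs_nonneg v
    have h2 : (2:Int) ≤ |v| := by omega
    have hsp := railAltHalve_spec (|v|) 0 (by omega)
    obtain ⟨hk1pos, hk1odd, he2n, hfc⟩ := hsp
    have he2 : (0:Int) ≤ (railAltHalve (|v|) 0).2 := he2n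
    have hfc' : |v| = 2 ^ (((railAltHalve (|v|) 0).2).toNat) * (railAltHalve (|v|) 0).1 := by
      have h00 : (((railAltHalve (|v|) 0).2) - 0).toNat = ((railAltHalve (|v|) 0).2).toNat := by
        norm_num
      rw [← h00]; exact hfc
    have hodd : railOdd (|v|) = (railAltHalve (|v|) 0).1 := railOdd_eq_halve_fst (|v|) 0
    have hz : railPow2 (|v| * |v|) (|v|) 1
        = pws (|v|) 2 (2 * ((railAltHalve (|v|) 0).2).toNat) 1 :=
      railPow2_eq_pws (|v|) _ _ hk1pos hk1odd hfc' h2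
    have hinv1 : ∀ d ∈ pws (|v|) 2 (2 * ((railAltHalve (|v|) 0).2).toNat) 1, 1 ≤ d ∧ d < |v| :=
      pws_mem_bounds _ 2 _ 1 (by omega) (by omega)
    have hdivs0 : (if (railAltHalve (|v|) 0).2 ≠ 0 then [((2:Int), (railAltHalve (|v|) 0).2)]
          else []).foldl (railAltStep (|v|)) [1]
        = pws (|v|) 2 (2 * ((railAltHalve (|v|) 0).2).toNat) 1 := by
      by_cases he : (railAltHalve (|v|) 0).2 = 0
      · rw [if_neg (by simp [he]), he]
        simp [pws, show (1:Int) < |v| by omega]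
      · rw [if_pos he]
        simp only [List.foldl_cons, List.foldl_nil]
        rw [railAltStep_eq (|v|) [1] 2 _ he2]
        have ht : ((2:Int) * (railAltHalve (|v|) 0).2).toNat
            = 2 * ((railAltHalve (|v|) 0).2).toNat := by omega
        rw [ht]
        simp
    have houter := railOuter_perm (|v|) h2 (((railAltHalve (|v|) 0).1 - 3).toNat) 3
      (railAltHalve (|v|) 0).1 rfl (by omega) (by omega)
      (pws (|v|) 2 (2 * ((railAltHalve (|v|) 0).2).toNat) 1)
      (pws (|v|) 2 (2 * ((railAltHalve (|v|) 0).2).toNat) 1) (List.Perm.refl _) hinv1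
    have hsh := railAltFacLoop_shift (((railAltHalve (|v|) 0).1 - 3).toNat) 3
      (railAltHalve (|v|) 0).1 rfl
      (if (railAltHalve (|v|) 0).2 ≠ 0 then [((2:Int), (railAltHalve (|v|) 0).2)] else [])
    rw [hodd, hz, hsh]
    obtain ⟨hKeq, hZperm, hZinv⟩ := houter
    rw [hKeq]
    set k1 := (railAltHalve (|v|) 0).1 with hk1def
    set D0 := pws (|v|) 2 (2 * ((railAltHalve (|v|) 0).2).toNat) 1 with hD0def
    set P2 := (railOuter (|v|) 3 k1 D0).2 with hP2def
    set Q1 := (railAltFacLoop 3 k1 []).1 with hQ1def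
    set T := (railAltFacLoop 3 k1 []).2 with hTdef
    set fac0 := (if (railAltHalve (|v|) 0).2 ≠ 0 then [((2:Int), (railAltHalve (|v|) 0).2)]
      else []) with hfac0def
    simp only [Prod.fst, Prod.snd]
    have hD1 : List.foldl (railAltStep (|v|)) [1] (fac0 ++ T)
        = List.foldl (railAltStep (|v|)) D0 T := by
      rw [List.foldl_append, hdivs0]
    by_cases hK : 1 < Q1
    · rw [if_pos hK, if_pos hK, slice_all, slice_window]
      have hBlist : List.foldl (railAltStep (|v|)) [1] (fac0 ++ T ++ [(Q1, 1)])
          = railAltStep (|v|) (List.foldl (railAltStep (|v|)) D0 T) (Q1, 1) := by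
        rw [List.foldl_append, hD1, List.foldl_cons, List.foldl_nil]
      rw [hBlist]
      have hinvE : ∀ a ∈ railExt (|v|) Q1 P2, 1 ≤ a ∧ a < |v| :=
        railExt_bounds _ Q1 P2 (by omega) hZinv
      have hinvEE : ∀ a ∈ railExt (|v|) Q1 (railExt (|v|) Q1 P2), 1 ≤ a ∧ a < |v| :=
        railExt_bounds _ Q1 _ (by omega) hinvE
      have hEE : railExt (|v|) Q1 (railExt (|v|) Q1 P2)
          = (railExt (|v|) Q1 (railExt (|v|) Q1 P2)).flatMap (pws (|v|) Q1 0) :=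
        (flatMap_pws_zero _ Q1 _ (fun a ha => (hinvEE a ha).2)).symm
      have hchain := chain_perm (|v|) Q1 (by omega) 0 P2 hZinv
      have hstep : railAltStep (|v|) (List.foldl (railAltStep (|v|)) D0 T) (Q1, 1)
          = (List.foldl (railAltStep (|v|)) D0 T).flatMap (pws (|v|) Q1 2) := by
        rw [railAltStep_eq _ _ Q1 1 (by omega)]
        norm_num
        rfl
      rw [hstep]
      refine foldl_count_eq y _ _ ?_
      have h1 : (P2 ++ railExt (|v|) Q1 P2 ++ railExt (|v|) Q1 (railExt (|v|) Q1 P2)).Perm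
          (P2.flatMap (pws (|v|) Q1 2)) := by
        rw [hEE]
        simpa using hchain
      exact h1.trans (List.Perm.flatMap hZperm (fun a _ => List.Perm.refl _))
    · rw [if_neg hK, if_neg hK, hD1]
      exact foldl_count_eq y _ _ hZperm

-- ---- Stage 2: both factorisation paths equal canonical trial division `allFac` ----

theorem railAltCount_fst_dvd (k i e : Int) : (railAltCount k i e).1 ∣ k := by
  fun_induction railAltCount with
  | case1 k e h ih =>
    have hd : i ∣ k := (PySem.Int.mod_eq_zero_iff_dvd k i).1 h.2.2
    obtain ⟨q, hq⟩ := hd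
    have hq' : PySem.Int.floordiv k i = q := by
      rw [PySem.Int.floordiv_eq_ediv_of_pos (by omega : 0 < i), hq,
        Int.mul_ediv_cancel_left q (by omega)]
    have hfdv : PySem.Int.floordiv k i ∣ k := ⟨i, by rw [hq']; rw [hq]; ring⟩
    exact dvd_trans ih hfdv
  | case2 => exact dvd_refl _

theorem railAltCount_not_dvd (k i e : Int) (hi : 2 ≤ i) (hk : 1 ≤ k) :
    ¬ (i ∣ (railAltCount k i e).1) := by
  fun_induction railAltCount with
  | case1 k e h ih =>
    exact ih (railDiv_lt h.1 h.2.1 h.2.2).1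
  | case2 k e h =>
    intro hdvd
    exact h ⟨hk, hi, (PySem.Int.mod_eq_zero_iff_dvd k i).2 hdvd⟩

theorem railAltCount_prod (k i : Int) (hi : 2 ≤ i) (hk : 1 ≤ k) :
    i ^ ((railAltCount k i 0).2).toNat * (railAltCount k i 0).1 = k := by
  suffices hgen : ∀ (N : Nat) (k e : Int), k.toNat = N → 1 ≤ k → 0 ≤ e →
      i ^ (((railAltCount k i e).2) - e).toNat * (railAltCount k i e).1 = k by
    have := hgen k.toNat k 0 rfl hk le_rfl
    simpa using this
  intro N
  induction N using Nat.strong_induction_on with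
  | _ N ih =>
  intro k e hN hk he
  by_cases hg : 1 ≤ k ∧ 2 ≤ i ∧ PySem.Int.mod k i = 0
  · have hlt := railDiv_lt hg.1 hg.2.1 hg.2.2
    rw [railAltCount, dif_pos hg]
    have hrec := ih (PySem.Int.floordiv k i).toNat (by omega) (PySem.Int.floordiv k i) (e + 1)
      rfl hlt.1 (by omega)
    have hshift := railAltCount_shift (PySem.Int.floordiv k i) i (e + 1)
    have hmono : e + 1 ≤ (railAltCount (PySem.Int.floordiv k i) i (e + 1)).2 := by
      rw [hshift]
      have := railAltCount_snd_nonneg (PySem.Int.floordiv k i) i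
      simp; omega
    have hexp : (((railAltCount (PySem.Int.floordiv k i) i (e + 1)).2) - e).toNat
        = (((railAltCount (PySem.Int.floordiv k i) i (e + 1)).2) - (e + 1)).toNat + 1 := by omega
    rw [hexp, pow_succ]
    have hfd : k = i * PySem.Int.floordiv k i := by
      obtain ⟨q, hq⟩ := (PySem.Int.mod_eq_zero_iff_dvd k i).1 hg.2.2
      rw [PySem.Int.floordiv_eq_ediv_of_pos (by omega : 0 < i), hq,
        Int.mul_ediv_cancel_left q (by omega)]
    calc i ^ ((railAltCount (PySem.Int.floordiv k i) i (e + 1)).2 - (e + 1)).toNat * i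
          * (railAltCount (PySem.Int.floordiv k i) i (e + 1)).1
        = i * (i ^ ((railAltCount (PySem.Int.floordiv k i) i (e + 1)).2 - (e + 1)).toNat
            * (railAltCount (PySem.Int.floordiv k i) i (e + 1)).1) := by ring
      _ = i * PySem.Int.floordiv k i := by rw [hrec]
      _ = k := hfd.symm
  · rw [railAltCount, dif_neg hg]
    simp

theorem railAltCount_snd_ne_dvd (k i : Int) (h : (railAltCount k i 0).2 ≠ 0) : i ∣ k := by
  by_cases hg : 1 ≤ k ∧ 2 ≤ i ∧ PySem.Int.mod k i = 0
  · exact (PySem.Int.mod_eq_zero_iff_dvd k i).1 hg.2.2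
  · rw [railAltCount, dif_neg hg] at h
    simp at h

-- canonical factorisation: trial division by EVERY candidate 2, 3, 4, …
def allFac (d k : Int) (fac : List (Int × Int)) : Int × List (Int × Int) :=
  if h : 2 ≤ d ∧ d * d ≤ k then
    let r := railAltCount k d 0
    allFac (d + 1) r.1 (if r.2 ≠ 0 then fac ++ [(d, r.2)] else fac)
  else (k, fac)
termination_by (k - d).toNat
decreasing_by
  have h1 : d + d ≤ d * d := by nlinarith
  have h2 := railAltCount_fst_le k d 0
  omega

def finFac (p : Int × List (Int × Int)) : List (Int × Int) :=
  if 1 < p.1 then p.2 ++ [(p.1, 1)] else p.2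

theorem railAltHalve_eq_count (k e : Int) : railAltHalve k e = railAltCount k 2 e := by
  induction hN : k.toNat using Nat.strong_induction_on generalizing k e with
  | _ N ih =>
  subst hN
  by_cases hg : 0 < k ∧ PySem.Int.mod k 2 = 0
  · have hg' : 1 ≤ k ∧ (2:Int) ≤ 2 ∧ PySem.Int.mod k 2 = 0 := ⟨by omega, le_rfl, hg.2⟩
    have hlt := railDiv_lt hg'.1 hg'.2.1 hg'.2.2
    rw [railAltHalve, dif_pos hg, railAltCount, dif_pos hg']
    exact ih _ (by omega) _ (e + 1) rfl
  · have hg' : ¬ (1 ≤ k ∧ (2:Int) ≤ 2 ∧ PySem.Int.mod k 2 = 0) := by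
      intro hc; exact hg ⟨by omega, hc.2.2⟩
    rw [railAltHalve, dif_neg hg, railAltCount, dif_neg hg']

theorem allFac_even_skip (d k : Int) (fac : List (Int × Int)) (hd : (2:Int) ∣ d) (h4 : 4 ≤ d)
    (hk : 1 ≤ k) (hodd : ¬ (2:Int) ∣ k) : allFac d k fac = allFac (d + 1) k fac := by
  by_cases hg : 2 ≤ d ∧ d * d ≤ k
  · have hnd : ¬ (d ∣ k) := fun hc => hodd (dvd_trans hd hc)
    have hcnt : railAltCount k d 0 = (k, 0) := by
      rw [railAltCount, dif_neg]
      intro hc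
      exact hnd ((PySem.Int.mod_eq_zero_iff_dvd k d).1 hc.2.2)
    rw [allFac, dif_pos hg, hcnt]
    simp
  · rw [allFac, dif_neg hg, allFac, dif_neg]
    intro hc
    exact hg ⟨by omega, by nlinarith [hc.2]⟩

theorem facLoop_eq_allFac_odd :
    ∀ (N : Nat) (d k : Int) (fac : List (Int × Int)), (k - d).toNat = N → 3 ≤ d →
      ¬ (2:Int) ∣ d → 1 ≤ k → ¬ (2:Int) ∣ k →
      railAltFacLoop d k fac = allFac d k fac := by
  intro N
  induction N using Nat.strong_induction_on with
  | _ N ih =>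
  intro d k fac hN hd hdodd hk hkodd
  by_cases hg : 3 ≤ d ∧ d * d ≤ k
  · have hg' : 2 ≤ d ∧ d * d ≤ k := ⟨by omega, hg.2⟩
    have hii : d + d ≤ d * d := by nlinarith
    have hle := railAltCount_fst_le k d 0
    have hpos := railAltCount_fst_pos k d 0 hk
    have hdvd := railAltCount_fst_dvd k d 0
    have hodd' : ¬ (2:Int) ∣ (railAltCount k d 0).1 :=
      fun hc => hkodd (dvd_trans hc hdvd)
    rw [railAltFacLoop, dif_pos hg, allFac, dif_pos hg']
    have hskip := allFac_even_skip (d + 1) (railAltCount k d 0).1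
      (if (railAltCount k d 0).2 ≠ 0 then fac ++ [(d, (railAltCount k d 0).2)] else fac)
      (by omega)  -- 2 ∣ d + 1 from odd d
      (by omega) hpos hodd'
    rw [hskip]
    show railAltFacLoop (d + 2) (railAltCount k d 0).1
        (if (railAltCount k d 0).2 ≠ 0 then fac ++ [(d, (railAltCount k d 0).2)] else fac)
      = allFac (d + 1 + 1) (railAltCount k d 0).1
        (if (railAltCount k d 0).2 ≠ 0 then fac ++ [(d, (railAltCount k d 0).2)] else fac)
    have hd2 : d + 1 + 1 = d + 2 := by ring
    rw [hd2]
    exact ih ((railAltCount k d 0).1 - (d + 2)).toNat (by omega) (d + 2) _ _ rfl (by omega)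
      (by omega) hpos hodd'
  · have hg' : ¬ (2 ≤ d ∧ d * d ≤ k) := fun hc => hg ⟨by omega, hc.2⟩
    rw [railAltFacLoop, dif_neg hg, allFac, dif_neg hg']

-- ---- Stage 2b: the sieve produces exactly the primes, and factoring by them equals allFac ----

def primesIn (lo hi : Int) : List Int :=
  (PySem.List.pyRange lo hi 1).filter (fun n => decide (Nat.Prime n.toNat))

theorem mem_primesIn (lo hi p : Int) :
    p ∈ primesIn lo hi ↔ lo ≤ p ∧ p < hi ∧ Nat.Prime p.toNat := by
  simp [primesIn, List.mem_filter, PySem.List.mem_pyRange_one, and_assoc]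

theorem pyRange_pairwise_lt (a b : Int) :
    (PySem.List.pyRange a b 1).Pairwise (· < ·) := by
  induction hN : (b - a).toNat using Nat.strong_induction_on generalizing a with
  | _ N ih =>
  by_cases hab : a < b
  · rw [PySem.List.pyRange_one_cons hab]
    refine List.Pairwise.cons ?_ (ih (b - (a + 1)).toNat (by omega) (a + 1) rfl)
    intro x hx
    rw [PySem.List.mem_pyRange_one] at hx
    omega
  · rw [PySem.List.pyRange_one_eq_nil (by omega)]
    exact List.Pairwise.nil

theorem primesIn_pairwise (lo hi : Int) : (primesIn lo hi).Pairwise (· < ·) :=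
  (pyRange_pairwise_lt lo hi).filter _

theorem railPrimesInner_true (n : Int) :
    ∀ ps : List Int, (∀ p ∈ ps, p * p ≤ n → PySem.Int.mod n p ≠ 0) →
      railPrimesInner n ps = true := by
  intro ps
  induction ps with
  | nil => intro _; rfl
  | cons p rest ih =>
    intro hps
    show railPrimesInner n (p :: rest) = true
    rw [railPrimesInner]
    by_cases h1 : p * p > n
    · rw [if_pos h1]
    · rw [if_neg h1, if_neg (hps p (by simp) (by omega))]
      exact ih (fun q hq => hps q (by simp [hq]))

theorem railPrimesInner_false (n : Int) :
    ∀ ps : List Int, ps.Pairwise (· < ·) → (∀ q ∈ ps, 0 ≤ q) →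
      ∀ p ∈ ps, p * p ≤ n → PySem.Int.mod n p = 0 → railPrimesInner n ps = false := by
  intro ps
  induction ps with
  | nil => intro _ _ p hp; simp at hp
  | cons q rest ih =>
    intro hpw hnn p hp hple hpd
    have hq0 : 0 ≤ q := hnn q (by simp)
    have hqle : q ≤ p := by
      rcases List.mem_cons.1 hp with hp | hp
      · omega
      · have := (List.pairwise_cons.1 hpw).1 p hp; omega
    have hqq : ¬ q * q > n := by nlinarith
    rw [railPrimesInner, if_neg hqq]
    by_cases hqdvd : PySem.Int.mod n q = 0
    · rw [if_pos hqdvd]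
    · rw [if_neg hqdvd]
      have hpr : p ∈ rest := by
        rcases List.mem_cons.1 hp with hp | hp
        · exact absurd (hp ▸ hpd) hqdvd
        · exact hp
      exact ih (List.pairwise_cons.1 hpw).2 (fun z hz => hnn z (by simp [hz])) p hpr hple hpd

theorem railPrimesInner_correct (n : Int) (hn : 2 ≤ n) :
    railPrimesInner n (primesIn 2 n) = decide (Nat.Prime n.toNat) := by
  by_cases hp : Nat.Prime n.toNat
  · rw [railPrimesInner_true n (primesIn 2 n) ?_, decide_eq_true hp]
    intro p hpmem hple hpd
    rw [mem_primesIn] at hpmem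
    obtain ⟨hp2, hplt, hppr⟩ := hpmem
    have hdvd : p ∣ n := (PySem.Int.mod_eq_zero_iff_dvd n p).1 hpd
    have hdnat : p.toNat ∣ n.toNat := by
      rw [← Int.natCast_dvd_natCast, Int.toNat_of_nonneg (by omega), Int.toNat_of_nonneg (by omega)]
      exact hdvd
    rcases hp.eq_one_or_self_of_dvd _ hdnat with h1 | h1
    · have : p = 1 := by omega
      omega
    · have : p = n := by omega
      omega
  · have hd : decide (Nat.Prime n.toNat) = false := by simp [hp]
    rw [hd]
    set m := n.toNat.minFac with hm
    have hn0 : 0 < n.toNat := by omega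
    have hmpr : Nat.Prime m := Nat.minFac_prime (by omega)
    have hmdvd : m ∣ n.toNat := Nat.minFac_dvd _
    have hmsq : m * m ≤ n.toNat := by
      have := Nat.minFac_sq_le_self hn0 hp
      nlinarith [this]
    have hm2 : 2 ≤ m := hmpr.two_le
    have hmlt : m < n.toNat := by
      rcases Nat.lt_or_ge m n.toNat with h | h
      · exact h
      · have := Nat.le_of_dvd hn0 hmdvd
        have hmn : m = n.toNat := by omega
        rw [hmn] at hmpr
        exact absurd hmpr hp
    have hmem : (m : Int) ∈ primesIn 2 n := by
      rw [mem_primesIn]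
      refine ⟨by exact_mod_cast hm2, ?_, by simpa using hmpr⟩
      have : (m : Int) < (n.toNat : Int) := by exact_mod_cast hmlt
      rwa [Int.toNat_of_nonneg (by omega)] at this
    refine railPrimesInner_false n (primesIn 2 n) (primesIn_pairwise 2 n)
      (fun q hq => by rw [mem_primesIn] at hq; omega) (m : Int) hmem ?_ ?_
    · have : ((m * m : Nat) : Int) ≤ ((n.toNat : Nat) : Int) := by exact_mod_cast hmsq
      push_cast at this
      rwa [Int.toNat_of_nonneg (by omega)] at this
    · rw [PySem.Int.mod_eq_zero_iff_dvd]
      have : ((m : Nat) : Int) ∣ ((n.toNat : Nat) : Int) := by exact_mod_cast hmdvd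
      rwa [Int.toNat_of_nonneg (by omega)] at this

theorem primesIn_succ (n : Int) (hn : 2 ≤ n) :
    primesIn 2 (n + 1) = primesIn 2 n ++ (if Nat.Prime n.toNat then [n] else []) := by
  unfold primesIn
  rw [PySem.List.pyRange_one_succ_right (by omega), List.filter_append]
  by_cases hp : Nat.Prime n.toNat <;> simp [hp]

theorem railPrimesLoop_eq (r : Int) : railPrimesLoop r = primesIn 2 r := by
  by_cases hr : r ≤ 2
  · unfold railPrimesLoop primesIn
    rw [PySem.List.pyRange_one_eq_nil hr]
    rfl
  · have hgen : ∀ (N : Nat) (lo : Int), 2 ≤ lo → lo ≤ r → (r - lo).toNat = N →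
        (PySem.List.pyRange lo r 1).foldl
          (fun primes n => if railPrimesInner n primes then primes ++ [n] else primes)
          (primesIn 2 lo) = primesIn 2 r := by
      intro N
      induction N using Nat.strong_induction_on with
      | _ N ih =>
      intro lo hlo2 hlor hN
      by_cases hlt : lo < r
      · rw [PySem.List.pyRange_one_cons hlt, List.foldl_cons]
        have hstep : (if railPrimesInner lo (primesIn 2 lo) then primesIn 2 lo ++ [lo]
              else primesIn 2 lo) = primesIn 2 (lo + 1) := by
          rw [railPrimesInner_correct lo hlo2, primesIn_succ lo hlo2]
          by_cases hp : Nat.Prime lo.toNat <;> simp [hp]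
        rw [hstep]
        exact ih (r - (lo + 1)).toNat (by omega) (lo + 1) (by omega) (by omega) rfl
      · have hlor' : lo = r := by omega
        subst hlor'
        rw [PySem.List.pyRange_one_eq_nil le_rfl]
        rfl
    have h0 : primesIn 2 2 = [] := by
      unfold primesIn
      rw [PySem.List.pyRange_one_eq_nil le_rfl]
      rfl
    have := hgen (r - 2).toNat 2 le_rfl (by omega) rfl
    rw [h0] at this
    exact this

-- factoring by the primes below r equals canonical trial division, for k < r*r
theorem railFacP_eq_allFac (r : Int) (hr1 : 1 ≤ r) :
    ∀ (N : Nat) (d k : Int) (fac : List (Int × Int)), (r - d).toNat = N → 2 ≤ d → 1 ≤ k →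
      k < r * r → (∀ q : Nat, q.Prime → (q : Int) ∣ k → d ≤ (q : Int)) →
      railFacP (primesIn d r) k fac = allFac d k fac := by
  intro N
  induction N using Nat.strong_induction_on with
  | _ N ih =>
  intro d k fac hN hd2 hk1 hkr hinv
  by_cases hdr : d < r
  · have hcons : primesIn d r = (if Nat.Prime d.toNat then [d] else []) ++ primesIn (d + 1) r := by
      unfold primesIn
      rw [PySem.List.pyRange_one_cons hdr]
      by_cases hp : Nat.Prime d.toNat <;> simp [hp]
    by_cases hp : Nat.Prime d.toNat
    · rw [hcons, if_pos hp]
      show railFacP (d :: primesIn (d + 1) r) k fac = allFac d k fac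
      rw [railFacP]
      by_cases hdd : d * d > k
      · rw [if_pos hdd, allFac, dif_neg (by omega)]
      · rw [if_neg hdd]
        rw [allFac, dif_pos ⟨hd2, by omega⟩]
        have hk' := railAltCount_fst_pos k d 0 hk1
        have hkle := railAltCount_fst_le k d 0
        have hnd := railAltCount_not_dvd k d 0 hd2 hk1
        have hdvd := railAltCount_fst_dvd k d 0
        exact ih (r - (d + 1)).toNat (by omega) (d + 1) (railAltCount k d 0).1 _ rfl (by omega)
          hk' (by omega) (fun q hq hqd => by
            have hge := hinv q hq (dvd_trans hqd hdvd)
            rcases eq_or_lt_of_le hge with heq | hlt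
            · exact absurd (heq ▸ hqd) hnd
            · omega)
    · -- composite candidate: it cannot divide k, so allFac keeps k and skips it
      have hnd : ¬ (d ∣ k) := by
        intro hdk
        have hdnat : d.toNat.minFac ∣ d.toNat := Nat.minFac_dvd _
        have hdpr : Nat.Prime d.toNat.minFac := Nat.minFac_prime (by omega)
        have hml : (d.toNat.minFac : Int) < d := by
          have hle : d.toNat.minFac ≤ d.toNat := Nat.le_of_dvd (by omega) hdnat
          have hne : d.toNat.minFac ≠ d.toNat := fun hc => hp (hc ▸ hdpr)
          omega
        have hdvdk : (d.toNat.minFac : Int) ∣ k := by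
          refine dvd_trans ?_ hdk
          have : ((d.toNat.minFac : Nat) : Int) ∣ ((d.toNat : Nat) : Int) := by
            exact_mod_cast hdnat
          rwa [Int.toNat_of_nonneg (by omega)] at this
        have := hinv _ hdpr hdvdk
        omega
      have hcnt : railAltCount k d 0 = (k, 0) := by
        rw [railAltCount, dif_neg]
        intro hc
        exact hnd ((PySem.Int.mod_eq_zero_iff_dvd k d).1 hc.2.2)
      rw [hcons, if_neg hp]
      show railFacP (primesIn (d + 1) r) k fac = allFac d k fac
      by_cases hdd : d * d ≤ k
      · rw [allFac, dif_pos ⟨hd2, hdd⟩, hcnt]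
        simp only [ne_eq, not_true_eq_false, if_neg (by simp : ¬ ((0:Int) ≠ 0))]
        exact ih (r - (d + 1)).toNat (by omega) (d + 1) k fac rfl (by omega) hk1 hkr
          (fun q hq hqd => by
            have hge := hinv q hq hqd
            rcases eq_or_lt_of_le hge with heq | hlt
            · exact absurd (heq ▸ hqd) hnd
            · omega)
      · rw [allFac, dif_neg (by omega)]
        -- remaining primes are ≥ d + 1, so their squares exceed k: the scan stops at once
        rcases hps : primesIn (d + 1) r with _ | ⟨p, rest⟩
        · rfl
        · have hpmem : p ∈ primesIn (d + 1) r := by rw [hps]; simp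
          rw [mem_primesIn] at hpmem
          rw [railFacP, if_pos (by nlinarith [hpmem.1])]
  · unfold primesIn
    rw [PySem.List.pyRange_one_eq_nil (by omega)]
    show railFacP [] k fac = allFac d k fac
    rw [railFacP, allFac, dif_neg]
    rintro ⟨-, hdd⟩
    nlinarith

-- ---- Stage 2c: the factor list produced is THE prime factorisation ----

def prodF (F : List (Int × Int)) : Int := (F.map (fun pe => pe.1 ^ pe.2.toNat)).prod

theorem prime_int_of_no_small_div (d : Int) (hd2 : 2 ≤ d)
    (hno : ∀ j : Int, 2 ≤ j → j < d → ¬ j ∣ d) : Prime d := by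
  have hnat : Nat.Prime d.toNat := by
    rw [Nat.prime_def_lt]
    refine ⟨by omega, ?_⟩
    intro m hm hmd
    by_contra hm1
    have hm0 : m ≠ 0 := by
      rintro rfl
      rw [Nat.zero_dvd] at hmd
      omega
    have hm2 : 2 ≤ m := by omega
    have hdvd : (m : Int) ∣ d := by
      have : ((m : Nat) : Int) ∣ ((d.toNat : Nat) : Int) := by exact_mod_cast hmd
      rwa [Int.toNat_of_nonneg (by omega)] at this
    exact hno (m : Int) (by exact_mod_cast hm2) (by omega) hdvd
  have := Nat.prime_iff_prime_int.mp hnat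
  rwa [Int.toNat_of_nonneg (by omega)] at this

theorem allFac_good :
    ∀ (N : Nat) (d k : Int) (fac : List (Int × Int)), (k - d).toNat = N → 2 ≤ d → 1 ≤ k →
      (∀ j : Int, 2 ≤ j → j < d → ¬ j ∣ k) →
      (∀ pe ∈ fac, 2 ≤ pe.1 ∧ Prime pe.1 ∧ 1 ≤ pe.2 ∧ pe.1 < d) →
      fac.Pairwise (fun a b => a.1 < b.1) →
      ∃ d', d ≤ d' ∧
        (∀ pe ∈ (allFac d k fac).2, 2 ≤ pe.1 ∧ Prime pe.1 ∧ 1 ≤ pe.2 ∧ pe.1 < d') ∧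
        ((allFac d k fac).2).Pairwise (fun a b => a.1 < b.1) ∧
        prodF (allFac d k fac).2 * (allFac d k fac).1 = prodF fac * k ∧
        1 ≤ (allFac d k fac).1 ∧
        (∀ j : Int, 2 ≤ j → j < d' → ¬ j ∣ (allFac d k fac).1) ∧
        (allFac d k fac).1 < d' * d' := by
  intro N
  induction N using Nat.strong_induction_on with
  | _ N ih =>
  intro d k fac hN hd2 hk1 hnod hfac hpw
  by_cases hg : 2 ≤ d ∧ d * d ≤ k
  · rw [allFac, dif_pos hg]
    have hk' := railAltCount_fst_pos k d 0 hk1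
    have hkle := railAltCount_fst_le k d 0
    have hnd := railAltCount_not_dvd k d 0 hd2 hk1
    have hdvd := railAltCount_fst_dvd k d 0
    have he0 := railAltCount_snd_nonneg k d
    have hprod := railAltCount_prod k d hd2 hk1
    have hdd : d + d ≤ d * d := by nlinarith
    have hnod' : ∀ j : Int, 2 ≤ j → j < d + 1 → ¬ j ∣ (railAltCount k d 0).1 := by
      intro j hj2 hjd hjdvd
      by_cases hjd' : j < d
      · exact hnod j hj2 hjd' (dvd_trans hjdvd hdvd)
      · have : j = d := by omega
        exact hnd (this ▸ hjdvd)
    have hfac' : ∀ pe ∈ (if (railAltCount k d 0).2 ≠ 0 then fac ++ [(d, (railAltCount k d 0).2)]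
          else fac), 2 ≤ pe.1 ∧ Prime pe.1 ∧ 1 ≤ pe.2 ∧ pe.1 < d + 1 := by
      intro pe hpe
      by_cases he : (railAltCount k d 0).2 ≠ 0
      · rw [if_pos he] at hpe
        rcases List.mem_append.1 hpe with hpe | hpe
        · have := hfac pe hpe; exact ⟨this.1, this.2.1, this.2.2.1, by omega⟩
        · simp at hpe
          subst hpe
          have hddvd : d ∣ k := railAltCount_snd_ne_dvd k d he
          refine ⟨hd2, prime_int_of_no_small_div d hd2 ?_, by simp; omega, by simp⟩
          intro j hj2 hjd hjdvd
          exact hnod j hj2 hjd (dvd_trans hjdvd hddvd)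
      · rw [if_neg he] at hpe
        have := hfac pe hpe; exact ⟨this.1, this.2.1, this.2.2.1, by omega⟩
    have hpw' : (if (railAltCount k d 0).2 ≠ 0 then fac ++ [(d, (railAltCount k d 0).2)]
          else fac).Pairwise (fun a b => a.1 < b.1) := by
      by_cases he : (railAltCount k d 0).2 ≠ 0
      · rw [if_pos he]
        rw [List.pairwise_append]
        exact ⟨hpw, List.pairwise_singleton _ _, by
          intro a ha b hb
          simp at hb
          subst hb
          exact (hfac a ha).2.2.2⟩
      · rw [if_neg he]; exact hpw
    obtain ⟨d', hd'ge, hC1, hC2, hC3, hC4, hC5, hC6⟩ :=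
      ih ((railAltCount k d 0).1 - (d + 1)).toNat (by omega) (d + 1) (railAltCount k d 0).1 _
        rfl (by omega) hk' hnod' hfac' hpw'
    refine ⟨d', by omega, hC1, hC2, ?_, hC4, hC5, hC6⟩
    rw [hC3]
    have hpf : prodF (if (railAltCount k d 0).2 ≠ 0 then fac ++ [(d, (railAltCount k d 0).2)]
          else fac) = prodF fac * d ^ ((railAltCount k d 0).2).toNat := by
      by_cases he : (railAltCount k d 0).2 ≠ 0
      · rw [if_pos he]
        unfold prodF
        rw [List.map_append, List.prod_append]
        simp
      · rw [if_neg he]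
        push_neg at he
        rw [he]
        simp
    rw [hpf]
    calc prodF fac * d ^ ((railAltCount k d 0).2).toNat * (railAltCount k d 0).1
        = prodF fac * (d ^ ((railAltCount k d 0).2).toNat * (railAltCount k d 0).1) := by ring
      _ = prodF fac * k := by rw [hprod]
  · rw [allFac, dif_neg hg]
    exact ⟨d, le_rfl, hfac, hpw, by ring, hk1, hnod, by omega⟩

-- the finalized factor list of h (both programs' final `fac`) is a genuine prime factorisation
theorem finFac_good (h d' : Int) (h1 : 1 ≤ h) (hd2 : 2 ≤ d')
    (kf : Int) (ff : List (Int × Int))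
    (hC1 : ∀ pe ∈ ff, 2 ≤ pe.1 ∧ Prime pe.1 ∧ 1 ≤ pe.2 ∧ pe.1 < d')
    (hC2 : ff.Pairwise (fun a b => a.1 < b.1))
    (hC3 : prodF ff * kf = h)
    (hC4 : 1 ≤ kf)
    (hC5 : ∀ j : Int, 2 ≤ j → j < d' → ¬ j ∣ kf)
    (hC6 : kf < d' * d') :
    (∀ pe ∈ finFac (kf, ff), 2 ≤ pe.1 ∧ Prime pe.1 ∧ 1 ≤ pe.2) ∧
      (finFac (kf, ff)).Pairwise (fun a b => a.1 < b.1) ∧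
      prodF (finFac (kf, ff)) = h := by
  unfold finFac
  by_cases hkf : 1 < kf
  · rw [if_pos hkf]
    have hkfge : d' ≤ kf := by
      by_contra hlt
      exact hC5 kf (by omega) (by omega) (dvd_refl kf)
    have hkfpr : Prime kf := by
      refine prime_int_of_no_small_div kf (by omega) ?_
      intro j hj2 hjlt hjdvd
      by_cases hjd' : j < d'
      · exact hC5 j hj2 hjd' hjdvd
      · obtain ⟨t, ht⟩ := hjdvd
        have ht1 : 1 ≤ t := by nlinarith
        have htd : t < d' := by nlinarith
        rcases eq_or_lt_of_le ht1 with h1t | h2t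
        · rw [← h1t] at ht; omega
        · exact hC5 t (by omega) htd ⟨j, by rw [ht]; ring⟩
    refine ⟨?_, ?_, ?_⟩
    · intro pe hpe
      rcases List.mem_append.1 hpe with hpe | hpe
      · have := hC1 pe hpe; exact ⟨this.1, this.2.1, this.2.2.1⟩
      · simp at hpe; subst hpe
        exact ⟨by omega, hkfpr, by simp⟩
    · rw [List.pairwise_append]
      refine ⟨hC2, List.pairwise_singleton _ _, ?_⟩
      intro a ha b hb
      simp at hb
      subst hb
      have := hC1 a ha
      simp
      omega
    · unfold prodF
      rw [List.map_append, List.prod_append]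
      simpa using hC3
  · rw [if_neg hkf]
    have hkf1 : kf = 1 := by omega
    refine ⟨fun pe hpe => ⟨(hC1 pe hpe).1, (hC1 pe hpe).2.1, (hC1 pe hpe).2.2.1⟩, hC2, ?_⟩
    rw [hkf1] at hC3
    simpa using hC3

-- ---- Stage 3: divisor-pair combinatorics of a prime factorisation ----

-- unpruned power chain [d, d*p, …, d*p^n]
def upws (p : Int) : Nat → Int → List Int
  | 0, d => [d]
  | n + 1, d => d :: upws p n (d * p)

-- all (divisor, complementary divisor) pairs of (prodF F)^2, in B's enumeration order
def lpairs : List (Int × Int) → List (Int × Int)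
  | [] => [(1, 1)]
  | (p, e) :: rest =>
      (List.range (2 * e.toNat + 1)).flatMap (fun a =>
        (lpairs rest).map (fun w => (p ^ a * w.1, p ^ (2 * e.toNat - a) * w.2)))

theorem upws_eq_map (p : Int) : ∀ (n : Nat) (d : Int),
    upws p n d = (List.range (n + 1)).map (fun a => d * p ^ a) := by
  intro n
  induction n with
  | zero => intro d; simp [upws]
  | succ n ih =>
    intro d
    have hr : List.range (n + 1 + 1) = 0 :: (List.range (n + 1)).map Nat.succ :=
      List.range_succ_eq_map
    rw [upws, ih (d * p), hr, List.map_cons, List.map_map]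
    simp only [pow_zero, mul_one]
    congr 1
    apply List.map_congr_left
    intro a _
    simp only [Function.comp_apply, pow_succ']
    ring

theorem pws_eq_filter (hlim p : Int) : ∀ (n : Nat) (d : Int),
    pws hlim p n d = (upws p n d).filter (fun t => decide (t < hlim)) := by
  intro n
  induction n with
  | zero => intro d; by_cases hd : d < hlim <;> simp [pws, upws, hd]
  | succ n ih =>
    intro d
    rw [pws, upws, ih (d * p), List.filter_cons]
    by_cases hd : d < hlim <;> simp [hd]

theorem lpairs_pos : ∀ F : List (Int × Int), (∀ pe ∈ F, 2 ≤ pe.1) →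
    ∀ w ∈ lpairs F, 1 ≤ w.1 ∧ 1 ≤ w.2 := by
  intro F
  induction F with
  | nil => intro _ w hw; simp [lpairs] at hw; subst hw; norm_num
  | cons pe rest ih =>
    intro hF w hw
    obtain ⟨p, e⟩ := pe
    simp only [lpairs, List.mem_flatMap, List.mem_map] at hw
    obtain ⟨a, _, w', hw', rfl⟩ := hw
    have hp2 : (2:Int) ≤ p := hF (p, e) (by simp)
    have h1 := ih (fun q hq => hF q (by simp [hq])) w' hw'
    constructor
    · have : (0:Int) < p ^ a := by positivity
      nlinarith [h1.1]
    · have : (0:Int) < p ^ (2 * e.toNat - a) := by positivity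
      nlinarith [h1.2]

def prodF2 (F : List (Int × Int)) : Int := (F.map (fun pe => pe.1 ^ (2 * pe.2.toNat))).prod

theorem prodF2_eq_sq (F : List (Int × Int)) : prodF2 F = prodF F * prodF F := by
  induction F with
  | nil => simp [prodF2, prodF]
  | cons pe rest ih =>
    obtain ⟨p, e⟩ := pe
    simp only [prodF2, prodF, List.map_cons, List.prod_cons] at *
    rw [ih]
    rw [two_mul, pow_add]
    ring

theorem lpairs_mul : ∀ F : List (Int × Int), ∀ w ∈ lpairs F, w.1 * w.2 = prodF2 F := by
  intro F
  induction F with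
  | nil => intro w hw; simp [lpairs] at hw; simp [prodF2, hw]
  | cons pe rest ih =>
    intro w hw
    obtain ⟨p, e⟩ := pe
    simp only [lpairs, List.mem_flatMap, List.mem_map] at hw
    obtain ⟨a, ha, w', hw', rfl⟩ := hw
    simp only [List.mem_range] at ha
    have hsum : p ^ a * p ^ (2 * e.toNat - a) = p ^ (2 * e.toNat) := by
      rw [← pow_add]
      congr 1
      omega
    simp only [prodF2, List.map_cons, List.prod_cons]
    calc p ^ a * w'.1 * (p ^ (2 * e.toNat - a) * w'.2)
        = (p ^ a * p ^ (2 * e.toNat - a)) * (w'.1 * w'.2) := by ring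
      _ = p ^ (2 * e.toNat) * prodF2 rest := by rw [hsum, ih w' hw']
      _ = _ := by simp [prodF2]

-- any prime dividing a product of the listed prime powers is one of the listed primes
theorem prodF_prime_dvd : ∀ F : List (Int × Int), (∀ pe ∈ F, 2 ≤ pe.1 ∧ Prime pe.1) →
    ∀ q : Int, Prime q → 0 ≤ q → q ∣ prodF F → ∃ pe ∈ F, q = pe.1 := by
  intro F
  induction F with
  | nil =>
    intro _ q hq _ hdvd
    simp [prodF] at hdvd
    exact absurd (isUnit_of_dvd_one hdvd) hq.not_unit
  | cons pe rest ih =>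
    intro hF q hq hq0 hdvd
    obtain ⟨p, e⟩ := pe
    simp only [prodF, List.map_cons, List.prod_cons] at hdvd
    rcases (Prime.dvd_mul hq).1 hdvd with hd | hd
    · have hdp : q ∣ p := hq.dvd_of_dvd_pow hd
      have hp := hF (p, e) (by simp)
      have hass := hq.associated_of_dvd hp.2 hdp
      rcases Int.associated_iff.1 hass with h1 | h1
      · exact ⟨(p, e), by simp, h1⟩
      · have hp2 : (2:Int) ≤ p := hp.1
        omega
    · obtain ⟨pe', hpe', hq'⟩ := ih (fun z hz => hF z (by simp [hz])) q hq hq0 hd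
      exact ⟨pe', by simp [hpe'], hq'⟩

theorem lpairs_prime_dvd : ∀ F : List (Int × Int), (∀ pe ∈ F, 2 ≤ pe.1 ∧ Prime pe.1) →
    ∀ w ∈ lpairs F, ∀ q : Int, Prime q → 0 ≤ q → q ∣ w.1 → ∃ pe ∈ F, q = pe.1 := by
  intro F
  induction F with
  | nil =>
    intro _ w hw q hq _ hdvd
    simp [lpairs] at hw
    subst hw
    simp only at hdvd
    exact absurd (isUnit_of_dvd_one hdvd) hq.not_unit
  | cons pe rest ih =>
    intro hF w hw q hq hq0 hdvd
    obtain ⟨p, e⟩ := pe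
    simp only [lpairs, List.mem_flatMap, List.mem_map] at hw
    obtain ⟨a, _, w', hw', rfl⟩ := hw
    simp only at hdvd
    rcases (Prime.dvd_mul hq).1 hdvd with hd | hd
    · have hdp : q ∣ p := hq.dvd_of_dvd_pow hd
      have hp := hF (p, e) (by simp)
      have hass := hq.associated_of_dvd hp.2 hdp
      rcases Int.associated_iff.1 hass with h1 | h1
      · exact ⟨(p, e), by simp, h1⟩
      · have : (2:Int) ≤ p := hp.1
        omega
    · obtain ⟨pe', hpe', hq'⟩ := ih (fun z hz => hF z (by simp [hz])) w' hw' q hq hq0 hd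
      exact ⟨pe', by simp [hpe'], hq'⟩

-- small sum/count helpers
theorem countP_flatMap {α β : Type} (q : β → Bool) (f : α → List β) (l : List α) :
    (l.flatMap f).countP q = (l.map (fun a => (f a).countP q)).sum := by
  induction l with
  | nil => simp
  | cons a l ih => simp [List.flatMap_cons, List.countP_append, ih]

theorem range_reflect_perm (n : Nat) :
    ((List.range (n + 1)).map (fun a => n - a)).Perm (List.range (n + 1)) := by
  have hnodup : ((List.range (n + 1)).map (fun a => n - a)).Nodup := by
    refine List.Nodup.map_on ?_ (List.nodup_range)
    intro a ha b hb hab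
    simp only [List.mem_range] at ha hb
    omega
  refine List.Perm.symm (List.perm_of_nodup_nodup_toFinset_eq (List.nodup_range) hnodup ?_)
  ext z
  simp only [List.mem_toFinset, List.mem_range, List.mem_map]
  constructor
  · intro hz
    exact ⟨n - z, by omega, by omega⟩
  · rintro ⟨a, ha, rfl⟩
    omega

-- the pair list is symmetric under swapping the two components
theorem lpairs_swap_perm : ∀ F : List (Int × Int),
    ((lpairs F).map Prod.swap).Perm (lpairs F) := by
  intro F
  induction F with
  | nil => simp [lpairs]
  | cons pe rest ih =>
    obtain ⟨p, e⟩ := pe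
    set n := 2 * e.toNat with hn
    show ((((List.range (n + 1)).flatMap (fun a =>
        (lpairs rest).map (fun w => (p ^ a * w.1, p ^ (n - a) * w.2))))).map Prod.swap).Perm _
    rw [List.map_flatMap]
    have hstep : ∀ a ∈ List.range (n + 1),
        ((lpairs rest).map (fun w => (p ^ a * w.1, p ^ (n - a) * w.2))).map Prod.swap
          = ((lpairs rest).map Prod.swap).map
              (fun w => (p ^ (n - a) * w.1, p ^ (n - (n - a)) * w.2)) := by
      intro a ha
      simp only [List.mem_range] at ha
      rw [List.map_map, List.map_map]
      apply List.map_congr_left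
      intro w _
      show (p ^ (n - a) * w.2, p ^ a * w.1) = (p ^ (n - a) * w.2, p ^ (n - (n - a)) * w.1)
      have hna : n - (n - a) = a := by omega
      rw [hna]
    have hA : ((List.range (n + 1)).flatMap (fun a =>
          ((lpairs rest).map (fun w => (p ^ a * w.1, p ^ (n - a) * w.2))).map Prod.swap)).Perm
        ((List.range (n + 1)).flatMap (fun a =>
          (lpairs rest).map (fun w => (p ^ (n - a) * w.1, p ^ (n - (n - a)) * w.2)))) := by
      refine List.Perm.flatMap (List.Perm.refl _) (fun a ha => ?_)
      rw [hstep a ha]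
      exact ih.map _
    have hB : (List.range (n + 1)).flatMap (fun a =>
          (lpairs rest).map (fun w => (p ^ (n - a) * w.1, p ^ (n - (n - a)) * w.2)))
        = ((List.range (n + 1)).map (fun a => n - a)).flatMap
            (fun b => (lpairs rest).map (fun w => (p ^ b * w.1, p ^ (n - b) * w.2))) := by
      rw [List.flatMap_map]
    refine hA.trans ?_
    rw [hB]
    exact List.Perm.flatMap (range_reflect_perm n) (fun a _ => List.Perm.refl _)

theorem sum_ite_range_nat (e : Nat) (C : Nat) :
    ∀ m : Nat, ((List.range m).map (fun a => if a = e then C else 0)).sum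
      = if e < m then C else 0 := by
  intro m
  induction m with
  | zero => simp
  | succ m ih =>
    rw [List.range_succ, List.map_append, List.sum_append, ih]
    by_cases he2 : e = m
    · subst he2
      simp
    · by_cases he : e < m
      · have h1 : e < m + 1 := by omega
        simp [he, h1, Ne.symm he2]
      · have h1 : ¬ e < m + 1 := by omega
        simp [he, h1, Ne.symm he2]

-- the factor list enumerates the middle divisor prodF F exactly once
theorem lpairs_count_middle : ∀ F : List (Int × Int),
    (∀ pe ∈ F, 2 ≤ pe.1 ∧ Prime pe.1 ∧ 1 ≤ pe.2) →
    F.Pairwise (fun a b => a.1 < b.1) →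
    (lpairs F).countP (fun w => decide (w.1 = prodF F)) = 1 := by
  intro F
  induction F with
  | nil => intro _ _; simp [lpairs, prodF]
  | cons pe rest ih =>
    intro hF hpw
    obtain ⟨p, e⟩ := pe
    have hp2 : (2:Int) ≤ p := (hF (p, e) (by simp)).1
    have hppr : Prime p := (hF (p, e) (by simp)).2.1
    have he1 : (1:Int) ≤ e := (hF (p, e) (by simp)).2.2
    have hrest : ∀ z ∈ rest, 2 ≤ z.1 ∧ Prime z.1 ∧ 1 ≤ z.2 := fun z hz => hF z (by simp [hz])
    have hlt : ∀ z ∈ rest, p < z.1 := (List.pairwise_cons.1 hpw).1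
    have hndH : ¬ p ∣ prodF rest := by
      intro hd
      obtain ⟨z, hz, hz'⟩ := prodF_prime_dvd rest (fun z hz => ⟨(hrest z hz).1, (hrest z hz).2.1⟩)
        p hppr (by omega) hd
      have := hlt z hz
      omega
    have hndW : ∀ w ∈ lpairs rest, ¬ p ∣ w.1 := by
      intro w hw hd
      obtain ⟨z, hz, hz'⟩ := lpairs_prime_dvd rest
        (fun z hz => ⟨(hrest z hz).1, (hrest z hz).2.1⟩) w hw p hppr (by omega) hd
      have := hlt z hz
      omega
    have hprodF : prodF ((p, e) :: rest) = p ^ e.toNat * prodF rest := by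
      simp [prodF]
    show ((List.range (2 * e.toNat + 1)).flatMap (fun a =>
        (lpairs rest).map (fun w => (p ^ a * w.1, p ^ (2 * e.toNat - a) * w.2)))).countP _ = 1
    rw [countP_flatMap]
    have hper : ∀ a ∈ List.range (2 * e.toNat + 1),
        ((lpairs rest).map (fun w => (p ^ a * w.1, p ^ (2 * e.toNat - a) * w.2))).countP
            (fun w => decide (w.1 = prodF ((p, e) :: rest)))
          = if a = e.toNat then (lpairs rest).countP (fun w => decide (w.1 = prodF rest)) else 0 := by
      intro a _
      rw [List.countP_map]
      by_cases ha : a = e.toNat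
      · subst ha
        rw [if_pos rfl]
        refine List.countP_congr ?_
        intro w hw
        simp only [Function.comp_apply, decide_eq_true_eq, hprodF]
        constructor
        · intro hEq
          exact mul_left_cancel₀ (by positivity) hEq
        · intro hEq
          rw [hEq]
      · rw [if_neg ha]
        rw [List.countP_eq_zero]
        intro w hw
        simp only [Function.comp_apply, decide_eq_true_eq, hprodF]
        intro hEq
        rcases Nat.lt_or_ge a e.toNat with hlt' | hge
        · have hsplit : p ^ e.toNat = p ^ a * p ^ (e.toNat - a) := by
            rw [← pow_add]
            congr 1
            omega
          rw [hsplit, mul_assoc] at hEq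
          have hc := mul_left_cancel₀ (show (p:Int) ^ a ≠ 0 by positivity) hEq
          have : p ∣ w.1 := by
            rw [hc]
            exact Dvd.dvd.mul_right (dvd_pow_self p (by omega)) _
          exact hndW w hw this
        · have ha' : e.toNat < a := by omega
          have hsplit : p ^ a = p ^ e.toNat * p ^ (a - e.toNat) := by
            rw [← pow_add]
            congr 1
            omega
          rw [hsplit, mul_assoc] at hEq
          have hc := mul_left_cancel₀ (show (p:Int) ^ e.toNat ≠ 0 by positivity) hEq
          have : p ∣ prodF rest := by
            rw [← hc]
            exact Dvd.dvd.mul_right (dvd_pow_self p (by omega)) _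
          exact hndH this
    rw [List.map_congr_left hper, sum_ite_range_nat, if_pos (by omega),
      ih hrest (List.pairwise_cons.1 hpw).2]

-- dropped (≥ h) divisors only generate dropped products
theorem filter_flatMap_drop (h : Int) (f : Int → List Int) :
    ∀ l : List Int, (∀ t ∈ l, ¬ t < h → ∀ z ∈ f t, ¬ z < h) →
      ((l.filter (fun t => decide (t < h))).flatMap f).filter (fun z => decide (z < h))
        = (l.flatMap f).filter (fun z => decide (z < h)) := by
  intro l
  induction l with
  | nil => intro _; rfl
  | cons t l ih =>
    intro hl
    rw [List.filter_cons]
    by_cases ht : t < h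
    · simp only [ht, decide_true, if_pos]
      rw [List.flatMap_cons, List.flatMap_cons, List.filter_append, List.filter_append,
        ih (fun z hz => hl z (by simp [hz]))]
    · simp only [ht, decide_false, if_neg, Bool.false_eq_true, not_false_eq_true]
      rw [List.flatMap_cons, List.filter_append,
        ih (fun z hz => hl z (by simp [hz]))]
      have hnil : (f t).filter (fun z => decide (z < h)) = [] := by
        rw [List.filter_eq_nil_iff]
        intro z hz
        simpa using hl t (by simp) ht z hz
      rw [hnil]
      rfl

-- A's staged pruned enumeration = pruned products over the full pair list
theorem foldl_step_filter (h : Int) :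
    ∀ (F : List (Int × Int)), (∀ pe ∈ F, 2 ≤ pe.1 ∧ 1 ≤ pe.2) →
      ∀ ds : List Int, (∀ d ∈ ds, 1 ≤ d ∧ d < h) →
        F.foldl (railAltStep h) ds
          = (ds.flatMap (fun d => (lpairs F).map (fun w => d * w.1))).filter
              (fun t => decide (t < h)) := by
  intro F
  induction F with
  | nil =>
    intro _ ds hds
    show ds = _
    have h1 : ds.flatMap (fun d => (lpairs []).map (fun w => d * w.1)) = ds := by
      simp [lpairs]
    rw [h1]
    exact (List.filter_eq_self.2 (fun a ha => by simpa using (hds a ha).2)).symm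
  | cons pe rest ih =>
    intro hF ds hds
    obtain ⟨p, e⟩ := pe
    have hp2 : (2:Int) ≤ p := (hF (p, e) (by simp)).1
    have he1 : (1:Int) ≤ e := (hF (p, e) (by simp)).2
    have hm : (2 * e).toNat = 2 * e.toNat := by omega
    rw [List.foldl_cons, railAltStep_eq h ds p e (by omega), hm]
    have hds' : ∀ d ∈ ds.flatMap (pws h p (2 * e.toNat)), 1 ≤ d ∧ d < h := by
      intro d hd
      rw [List.mem_flatMap] at hd
      obtain ⟨d0, hd0, hdp⟩ := hd
      exact pws_mem_bounds h p _ d0 (by omega) (hds d0 hd0).1 d hdp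
    rw [ih (fun z hz => hF z (by simp [hz])) _ hds']
    have hW1 : ∀ w ∈ lpairs rest, 1 ≤ w.1 := by
      intro w hw
      exact (lpairs_pos rest (fun z hz => (hF z (by simp [hz])).1) w hw).1
    -- reassociate both sides into one flatMap over ds
    rw [List.flatMap_assoc]
    have hperD : ∀ d ∈ ds,
        ((pws h p (2 * e.toNat) d).flatMap
            (fun t => (lpairs rest).map (fun w => t * w.1))).filter (fun t => decide (t < h))
          = ((lpairs ((p, e) :: rest)).map (fun w => d * w.1)).filter
              (fun t => decide (t < h)) := by
      intro d hd
      have hd1 : (1:Int) ≤ d := (hds d hd).1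
      have hdrop : ∀ t ∈ upws p (2 * e.toNat) d, ¬ t < h →
          ∀ z ∈ (lpairs rest).map (fun w => t * w.1), ¬ z < h := by
        intro t ht htge z hz
        rw [List.mem_map] at hz
        obtain ⟨w, hw, rfl⟩ := hz
        rw [upws_eq_map, List.mem_map] at ht
        obtain ⟨a, _, rfl⟩ := ht
        have hw1 : 1 ≤ w.1 := hW1 w hw
        have hpa : (1:Int) ≤ p ^ a := one_le_pow₀ (by omega)
        have ht0 : (0:Int) ≤ d * p ^ a := by nlinarith
        have := mul_le_mul_of_nonneg_left hw1 ht0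
        nlinarith
      rw [pws_eq_filter, filter_flatMap_drop h _ _ hdrop]
      have hEq : (upws p (2 * e.toNat) d).flatMap
            (fun t => (lpairs rest).map (fun w => t * w.1))
          = (lpairs ((p, e) :: rest)).map (fun w => d * w.1) := by
        rw [upws_eq_map, List.flatMap_map]
        show _ = ((List.range (2 * e.toNat + 1)).flatMap (fun a =>
          (lpairs rest).map (fun w => (p ^ a * w.1, p ^ (2 * e.toNat - a) * w.2)))).map
            (fun w => d * w.1)
        rw [List.map_flatMap]
        refine List.flatMap_congr (fun a _ => ?_)
        rw [List.map_map]
        refine List.map_congr_left (fun w _ => ?_)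
        show d * p ^ a * w.1 = d * (p ^ a * w.1)
        ring
      rw [hEq]
    rw [List.filter_flatMap, List.filter_flatMap]
    exact List.flatMap_congr hperD

-- ---- Stage 3c: B's recursion is the sum over the pair list; sum splitting ----

theorem sum_flatMap_int {α : Type} (f : α → List Int) (l : List α) :
    (l.flatMap f).sum = (l.map (fun a => (f a).sum)).sum := by
  induction l with
  | nil => simp
  | cons a l ih => simp [List.flatMap_cons, List.sum_append, ih]

theorem foldl_pair_loop (g : Int → Int) (p : Int) {α : Type} :
    ∀ (l : List α) (t d : Int),
      l.foldl (fun (td : Int × Int) _ => (td.1 + g td.2, td.2 * p)) (t, d)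
        = (t + ((List.range l.length).map (fun a => g (d * p ^ a))).sum, d * p ^ l.length) := by
  intro l
  induction l with
  | nil => intro t d; simp
  | cons x l ih =>
    intro t d
    rw [List.foldl_cons, ih (t + g d) (d * p)]
    have hr : List.range (l.length + 1) = 0 :: (List.range l.length).map Nat.succ :=
      List.range_succ_eq_map
    show ((t + g d) + _, _) = _
    rw [List.length_cons, hr, List.map_cons, List.map_map, List.sum_cons, pow_zero, mul_one,
      Prod.mk.injEq]
    refine ⟨?_, ?_⟩
    · have h1 : List.map ((fun a => g (d * p ^ a)) ∘ Nat.succ) (List.range l.length)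
          = List.map (fun a => g (d * p * p ^ a)) (List.range l.length) :=
        List.map_congr_left (fun a _ => by
          show g (d * p ^ (a + 1)) = g (d * p * p ^ a)
          congr 1
          rw [pow_succ]
          ring)
      rw [h1]
      ring
    · rw [pow_succ]
      ring

theorem railDfs_eq_sum (ys : List Int) (hh : Int) :
    ∀ F : List (Int × Int), (∀ pe ∈ F, 1 ≤ pe.2) → ∀ d0 : Int,
      railDfs ys hh F d0
        = ((lpairs F).map (fun w =>
            if -(d0 * w.1) ∈ ys ∧ PySem.Int.floordiv hh (d0 * w.1) ∈ ys then (1:Int) else 0)).sum := by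
  intro F
  induction F with
  | nil =>
    intro _ d0
    simp [railDfs, lpairs]
  | cons pe rest ih =>
    intro hF d0
    obtain ⟨p, e⟩ := pe
    have he1 : (1:Int) ≤ e := hF (p, e) (by simp)
    show ((PySem.List.pyRange 0 (2 * e + 1) 1).foldl
        (fun (td : Int × Int) _ => (td.1 + railDfs ys hh rest td.2, td.2 * p)) (0, d0)).1 = _
    rw [foldl_pair_loop (railDfs ys hh rest) p _ 0 d0]
    have hlen : (PySem.List.pyRange 0 (2 * e + 1) 1).length = 2 * e.toNat + 1 := by
      rw [PySem.List.length_pyRange_one]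
      omega
    rw [hlen]
    simp only [zero_add]
    have hL : ∀ a ∈ List.range (2 * e.toNat + 1),
        railDfs ys hh rest (d0 * p ^ a)
          = ((lpairs rest).map (fun w =>
              if -(d0 * (p ^ a * w.1)) ∈ ys ∧ PySem.Int.floordiv hh (d0 * (p ^ a * w.1)) ∈ ys
              then (1:Int) else 0)).sum := by
      intro a _
      rw [ih (fun z hz => hF z (by simp [hz])) (d0 * p ^ a)]
      refine congrArg List.sum (List.map_congr_left (fun w _ => ?_))
      rw [mul_assoc]
    rw [List.map_congr_left hL]
    rw [show lpairs ((p, e) :: rest) = (List.range (2 * e.toNat + 1)).flatMap (fun a =>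
        (lpairs rest).map (fun w => (p ^ a * w.1, p ^ (2 * e.toNat - a) * w.2))) from rfl,
      List.map_flatMap, sum_flatMap_int]
    refine congrArg List.sum (List.map_congr_left (fun a _ => ?_))
    rw [List.map_map]
    rfl

theorem sum_map_split_lt (h : Int) (g : Int × Int → Int) (l : List (Int × Int)) :
    (l.map g).sum = ((l.filter (fun w => decide (w.1 < h))).map g).sum
      + ((l.filter (fun w => decide (w.1 = h))).map g).sum
      + ((l.filter (fun w => decide (h < w.1))).map g).sum := by
  induction l with
  | nil => simp
  | cons w l ih =>
    rw [List.map_cons, List.sum_cons, ih, List.filter_cons, List.filter_cons, List.filter_cons]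
    rcases lt_trichotomy w.1 h with hc | hc | hc
    · rw [if_pos (by simpa using hc), if_neg (by simp; omega), if_neg (by simp; omega),
        List.map_cons, List.sum_cons]
      ring
    · rw [if_neg (by simp; omega), if_pos (by simpa using hc), if_neg (by simp; omega),
        List.map_cons, List.sum_cons]
      ring
    · rw [if_neg (by simp; omega), if_neg (by simp; omega), if_pos (by simpa using hc),
        List.map_cons, List.sum_cons]
      ring

theorem sum_map_const_of_mem {α : Type} (l : List α) (g : α → Int) (C : Int)
    (hg : ∀ a ∈ l, g a = C) : (l.map g).sum = l.length * C := by
  induction l with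
  | nil => simp
  | cons a l ih =>
    rw [List.map_cons, List.sum_cons, hg a (by simp), ih (fun z hz => hg z (by simp [hz])),
      List.length_cons]
    push_cast
    ring

-- ---- Stage 4: per-element equality and the verdict ----

theorem ite_and_comm (P Q : Prop) [Decidable (P ∧ Q)] [Decidable (Q ∧ P)] :
    (if P ∧ Q then (1:Int) else 0) = if Q ∧ P then 1 else 0 := by
  split_ifs with h1 h2
  · rfl
  · exact absurd ⟨h1.2, h1.1⟩ h2
  · rename_i h3
    exact absurd ⟨h3.2, h3.1⟩ h1
  · rfl

theorem oldFac_eq_allFac (h : Int) (h2 : 2 ≤ h) :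
    finFac (railAltFacLoop 3 (railAltHalve h 0).1
        (if (railAltHalve h 0).2 ≠ 0 then [(2, (railAltHalve h 0).2)] else []))
      = finFac (allFac 2 h []) := by
  obtain ⟨hk1, hodd, -, -⟩ := railAltHalve_spec h 0 (by omega)
  have hoddk : ¬ (2:Int) ∣ (railAltHalve h 0).1 := by
    intro hd
    rw [← PySem.Int.mod_eq_zero_iff_dvd] at hd
    omega
  by_cases h4 : 4 ≤ h
  · have hg : (2:Int) ≤ 2 ∧ 2 * 2 ≤ h := ⟨le_rfl, by omega⟩
    rw [allFac, dif_pos hg]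
    show _ = finFac (allFac (2 + 1) (railAltCount h 2 0).1
      (if (railAltCount h 2 0).2 ≠ 0 then [] ++ [(2, (railAltCount h 2 0).2)] else []))
    rw [show (2:Int) + 1 = 3 from by norm_num, ← railAltHalve_eq_count]
    simp only [List.nil_append]
    exact congrArg finFac (facLoop_eq_allFac_odd ((railAltHalve h 0).1 - 3).toNat 3
      (railAltHalve h 0).1 _ rfl le_rfl (by omega) (by omega) hoddk)
  · have hh : h = 2 ∨ h = 3 := by omega
    rcases hh with rfl | rfl
    · have e1 : railAltHalve 2 0 = (1, 1) := by
        rw [railAltHalve, dif_pos (by decide : (0:Int) < 2 ∧ PySem.Int.mod 2 2 = 0)]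
        rw [show PySem.Int.floordiv 2 2 = 1 from by decide, show (0:Int) + 1 = 1 from by norm_num]
        rw [railAltHalve, dif_neg (by decide)]
      rw [e1]
      show finFac (railAltFacLoop 3 1 (if (1:Int) ≠ 0 then [(2, 1)] else [])) = _
      rw [if_pos (by norm_num : (1:Int) ≠ 0)]
      rw [railAltFacLoop, dif_neg (by decide), allFac, dif_neg (by decide)]
      unfold finFac
      norm_num
    · have e1 : railAltHalve 3 0 = (3, 0) := by
        rw [railAltHalve, dif_neg (by decide)]
      rw [e1]
      show finFac (railAltFacLoop 3 3 (if (0:Int) ≠ 0 then [(2, 0)] else [])) = _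
      rw [if_neg (by norm_num : ¬ (0:Int) ≠ 0)]
      rw [railAltFacLoop, dif_neg (by decide), allFac, dif_neg (by decide)]

theorem railFacP_one (ps : List Int) (hps : ∀ p ∈ ps, 2 ≤ p) : railFacP ps 1 [] = (1, []) := by
  cases ps with
  | nil => rfl
  | cons p rest =>
    have h2 : (2:Int) ≤ p := hps p (by simp)
    show (if p * p > 1 then ((1:Int), ([] : List (Int × Int))) else _) = _
    rw [if_pos (by nlinarith)]

theorem railR_spec (m : Int) :
    ∀ (N : Nat) (r : Int), (m + 1 - r).toNat = N → 1 ≤ r →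
      1 ≤ railR m r ∧ m < railR m r * railR m r := by
  intro N
  induction N using Nat.strong_induction_on with
  | _ N ih =>
  intro r hN hr1
  by_cases hg : r * r ≤ m ∧ 1 ≤ r
  · have hrm : r ≤ m := by nlinarith [hg.1]
    rw [railR, dif_pos hg]
    exact ih (m + 1 - (r + 1)).toNat (by omega) (r + 1) rfl (by omega)
  · rw [railR, dif_neg hg]
    refine ⟨hr1, ?_⟩
    rcases not_and_or.1 hg with hc | hc
    · omega
    · omega

theorem railMax_ge (x : List Int) :
    0 ≤ railMax x ∧ ∀ v ∈ x, (if v < 0 then -v else v) ≤ railMax x := by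
  have hfun : (fun (m v : Int) => let a := if v < 0 then -v else v; if a > m then a else m)
      = (fun (m v : Int) => max m (if v < 0 then -v else v)) := by
    funext m v
    show (if (if v < 0 then -v else v) > m then (if v < 0 then -v else v) else m) = _
    rw [max_def]
    split_ifs <;> omega
  unfold railMax
  rw [hfun]
  exact PySem.List.le_foldl_max_int x (fun v => if v < 0 then -v else v) 0

-- the heart: A's two-sided count over divisors < h equals B's one-sided count over ALL divisors
theorem body_sum_eq (ys : List Int) (h : Int) (h2 : 2 ≤ h) (F : List (Int × Int))
    (hFp : ∀ pe ∈ F, 2 ≤ pe.1 ∧ Prime pe.1 ∧ 1 ≤ pe.2)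
    (hpw : F.Pairwise (fun a b => a.1 < b.1))
    (hprod : prodF F = h) (t1acc : Int) :
    (F.foldl (railAltStep h) [1]).foldl (fun total d =>
        (total + (if -d ∈ ys ∧ PySem.Int.floordiv (h * h) d ∈ ys then 1 else 0))
          + (if d ∈ ys ∧ -PySem.Int.floordiv (h * h) d ∈ ys then 1 else 0)) t1acc
        + (if -h ∈ ys ∧ h ∈ ys then 1 else 0)
      = t1acc + railDfs ys (h * h) F 1 := by
  have hW := lpairs_pos F (fun pe hpe => (hFp pe hpe).1)
  have hmul : ∀ w ∈ lpairs F, w.1 * w.2 = h * h := by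
    intro w hw
    rw [lpairs_mul F w hw, prodF2_eq_sq, hprod]
  have hfd : ∀ w ∈ lpairs F, PySem.Int.floordiv (h * h) w.1 = w.2 := by
    intro w hw
    have h1 := (hW w hw).1
    rw [PySem.Int.floordiv_eq_ediv_of_pos (by omega : 0 < w.1), ← hmul w hw,
      Int.mul_ediv_cancel_left _ (by omega : w.1 ≠ 0)]
  -- A's divisor list = first components of the pairs with small first component
  have hdivs : F.foldl (railAltStep h) [1]
      = (((lpairs F).filter (fun w => decide (w.1 < h))).map Prod.fst) := by
    rw [foldl_step_filter h F (fun pe hpe => ⟨(hFp pe hpe).1, (hFp pe hpe).2.2⟩) [1]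
      (by intro d hd; simp at hd; omega)]
    have h1 : ([(1:Int)].flatMap (fun d => (lpairs F).map (fun w => d * w.1)))
        = (lpairs F).map Prod.fst := by
      simp
    rw [h1, List.filter_map]
    rfl
  -- unfold A's fold into a sum
  have hfold : ∀ (l : List Int) (t : Int), l.foldl (fun total d =>
        (total + (if -d ∈ ys ∧ PySem.Int.floordiv (h * h) d ∈ ys then 1 else 0))
          + (if d ∈ ys ∧ -PySem.Int.floordiv (h * h) d ∈ ys then 1 else 0)) t
      = t + (l.map (fun d => (if -d ∈ ys ∧ PySem.Int.floordiv (h * h) d ∈ ys then (1:Int) else 0)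
          + (if d ∈ ys ∧ -PySem.Int.floordiv (h * h) d ∈ ys then 1 else 0))).sum := by
    intro l t
    rw [← foldl_add_map]
    exact List.foldl_ext _ _ t (fun a b _ => (add_assoc a _ _))
  rw [hdivs, hfold]
  -- rewrite the summand through the pairs
  have hT : ((((lpairs F).filter (fun w => decide (w.1 < h))).map Prod.fst).map
        (fun d => (if -d ∈ ys ∧ PySem.Int.floordiv (h * h) d ∈ ys then (1:Int) else 0)
          + (if d ∈ ys ∧ -PySem.Int.floordiv (h * h) d ∈ ys then 1 else 0))).sum
      = (((lpairs F).filter (fun w => decide (w.1 < h))).map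
          (fun w => (if -w.1 ∈ ys ∧ w.2 ∈ ys then (1:Int) else 0))).sum
        + (((lpairs F).filter (fun w => decide (w.1 < h))).map
          (fun w => (if w.1 ∈ ys ∧ -w.2 ∈ ys then (1:Int) else 0))).sum := by
    rw [List.map_map, ← PySem.List.sum_map_add_int]
    refine congrArg List.sum (List.map_congr_left (fun w hw => ?_))
    have hwF := List.mem_of_mem_filter hw
    show (if -w.1 ∈ ys ∧ PySem.Int.floordiv (h * h) w.1 ∈ ys then (1:Int) else 0)
        + (if w.1 ∈ ys ∧ -PySem.Int.floordiv (h * h) w.1 ∈ ys then 1 else 0) = _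
    rw [hfd w hwF]
  rw [hT]
  -- B's recursion as the full sum
  have hB : railDfs ys (h * h) F 1
      = ((lpairs F).map (fun w => (if -w.1 ∈ ys ∧ w.2 ∈ ys then (1:Int) else 0))).sum := by
    rw [railDfs_eq_sum ys (h * h) F (fun pe hpe => (hFp pe hpe).2.2) 1]
    refine congrArg List.sum (List.map_congr_left (fun w hw => ?_))
    rw [one_mul, hfd w hw]
  -- split the full sum three ways
  have hsplit := sum_map_split_lt h (fun w => (if -w.1 ∈ ys ∧ w.2 ∈ ys then (1:Int) else 0))
    (lpairs F)
  -- middle part: exactly the ±h pair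
  have hmid : (((lpairs F).filter (fun w => decide (w.1 = h))).map
        (fun w => (if -w.1 ∈ ys ∧ w.2 ∈ ys then (1:Int) else 0))).sum
      = (if -h ∈ ys ∧ h ∈ ys then 1 else 0) := by
    have hconst : ∀ w ∈ (lpairs F).filter (fun w => decide (w.1 = h)),
        (if -w.1 ∈ ys ∧ w.2 ∈ ys then (1:Int) else 0) = (if -h ∈ ys ∧ h ∈ ys then 1 else 0) := by
      intro w hw
      have hw1 : w.1 = h := by simpa using List.of_mem_filter hw
      have hwF := List.mem_of_mem_filter hw
      have hw2 : w.2 = h := by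
        have := hmul w hwF
        rw [hw1] at this
        have hh0 : h ≠ 0 := by omega
        exact mul_left_cancel₀ hh0 this
      rw [hw1, hw2]
    rw [sum_map_const_of_mem _ _ _ hconst]
    have hlen : ((lpairs F).filter (fun w => decide (w.1 = h))).length = 1 := by
      rw [← List.countP_eq_length_filter]
      have := lpairs_count_middle F hFp hpw
      rw [hprod] at this
      exact this
    rw [hlen]
    norm_num
  -- large part: the swapped small part
  have hlarge : (((lpairs F).filter (fun w => decide (h < w.1))).map
        (fun w => (if -w.1 ∈ ys ∧ w.2 ∈ ys then (1:Int) else 0))).sum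
      = (((lpairs F).filter (fun w => decide (w.1 < h))).map
          (fun w => (if w.1 ∈ ys ∧ -w.2 ∈ ys then (1:Int) else 0))).sum := by
    have hperm : ((lpairs F).filter (fun w => decide (h < w.1))).Perm
        ((((lpairs F).filter (fun w => decide (h < w.2)))).map Prod.swap) := by
      have h1 := (lpairs_swap_perm F).symm.filter (fun w => decide (h < w.1))
      refine h1.trans ?_
      rw [List.filter_map]
      rfl
    rw [((hperm.map _).sum_eq : _)]
    rw [List.map_map]
    have hfe : ((lpairs F).filter (fun w => decide (h < w.2)))
        = ((lpairs F).filter (fun w => decide (w.1 < h))) := by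
      refine List.filter_congr (fun w hw => ?_)
      have h1 := (hW w hw).1
      have h2 := (hW w hw).2
      have h3 := hmul w hw
      simp only [decide_eq_decide]
      constructor
      · intro hlt
        nlinarith
      · intro hlt
        nlinarith
    rw [hfe]
    refine congrArg List.sum (List.map_congr_left (fun w hw => ?_))
    show (if -w.2 ∈ ys ∧ w.1 ∈ ys then (1:Int) else 0) = _
    exact ite_and_comm _ _
  rw [hB, hsplit, hmid, hlarge]
  ring

-- per-element agreement of the old factorize-then-enumerate body with B's body
theorem bodies_eq (ys : List Int) (r : Int) (hr1 : 1 ≤ r) (total v : Int)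
    (hvr : |v| < r * r) :
    railAltBodyOld ys total v = railAltBody ys (railPrimesLoop r) total v := by
  rw [railPrimesLoop_eq]
  unfold railAltBodyOld railAltBody
  have habs : (if v < 0 then -v else v) = |v| := by
    split_ifs with hvneg
    · exact (abs_of_neg hvneg).symm
    · exact (abs_of_nonneg (by omega)).symm
  rw [habs]
  by_cases h0 : |v| = 0
  · rw [h0]
    rw [if_pos (show (0:Int) < 2 by norm_num), if_pos (show (0:Int) = 0 from rfl)]
    norm_num
  · rw [if_neg h0]
    have habs0 : 0 ≤ |v| := abs_nonneg v
    by_cases h1 : |v| = 1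
    · rw [h1]
      rw [if_pos (show (1:Int) < 2 by norm_num)]
      rw [railFacP_one _ (fun p hp => by rw [mem_primesIn] at hp; omega)]
      show total + _ = total + railDfs ys (1 * 1) (if (1:Int) < 1 then [] ++ [(1, 1)] else []) 1
      rw [if_neg (show ¬ (1:Int) < 1 by norm_num)]
      show _ = total + (if -(1:Int) ∈ ys ∧ PySem.Int.floordiv (1 * 1) 1 ∈ ys then (1:Int) else 0)
      rw [show PySem.Int.floordiv (1 * 1) 1 = 1 from by decide]
    · have h2 : (2:Int) ≤ |v| := by omega
      rw [if_neg (show ¬ |v| < 2 by omega)]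
      -- both factor lists are finFac (allFac 2 |v| [])
      have hBfac : railFacP (primesIn 2 r) (|v|) [] = allFac 2 (|v|) [] := by
        refine railFacP_eq_allFac r hr1 (r - 2).toNat 2 (|v|) [] rfl le_rfl (by omega) hvr ?_
        intro q hq _
        have := hq.two_le
        exact_mod_cast this
      obtain ⟨d', hd'2, hC1, hC2, hC3, hC4, hC5, hC6⟩ :=
        allFac_good ((|v|) - 2).toNat 2 (|v|) [] rfl le_rfl (by omega)
          (fun j hj2 hjd _ => by omega) (fun pe hpe => absurd hpe (List.not_mem_nil))
          List.Pairwise.nil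
      have hgood := finFac_good (|v|) d' (by omega) (by omega) (allFac 2 (|v|) []).1
        (allFac 2 (|v|) []).2 hC1 hC2 (by simpa [prodF] using hC3) hC4 hC5 hC6
      have hfin : ((allFac 2 (|v|) []).1, (allFac 2 (|v|) []).2) = allFac 2 (|v|) [] := rfl
      rw [hfin] at hgood
      obtain ⟨hG1, hG2, hG3⟩ := hgood
      have hold := oldFac_eq_allFac (|v|) h2
      -- A's side: its final list IS finFac of the loop result
      show (List.foldl
          (fun total d =>
            (total + if -d ∈ ys ∧ PySem.Int.floordiv (|v| * |v|) d ∈ ys then 1 else 0)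
              + if d ∈ ys ∧ -PySem.Int.floordiv (|v| * |v|) d ∈ ys then 1 else 0)
          (total + if -|v| ∈ ys ∧ |v| ∈ ys then 1 else 0)
          (List.foldl (railAltStep |v|) [1]
            (finFac (railAltFacLoop 3 (railAltHalve (|v|) 0).1
              (if (railAltHalve (|v|) 0).2 ≠ 0 then [(2, (railAltHalve (|v|) 0).2)] else [])))))
        = total + railDfs ys (|v| * |v|) (finFac (railFacP (primesIn 2 r) (|v|) [])) 1
      rw [hBfac, hold]
      have := body_sum_eq ys (|v|) h2 (finFac (allFac 2 (|v|) [])) hG1 hG2 hG3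
        (total + (if -|v| ∈ ys ∧ |v| ∈ ys then 1 else 0))
      omega

-- ===== VERDICT (by name: the statement is the Claim_ definition above) =====
theorem rail_spec : Claim_equal_rail := by
  intro x y _
  show rail x y = rail_alt x y
  unfold rail rail_alt
  have hfun : railBody y = railAltBodyOld (PySem.Set.ofList y) := by
    funext t v
    exact railBody_eq y t v
  rw [hfun]
  show List.foldl (railAltBodyOld (PySem.Set.ofList y)) 0 x
      = List.foldl (railAltBody (PySem.Set.ofList y) (railPrimesLoop (railR (railMax x) 1))) 0 x
  refine PySem.List.foldl_congr_mem _ _ _ _ ?_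
  intro acc v hv
  have hmax := railMax_ge x
  have hr := railR_spec (railMax x) (railMax x + 1 - 1).toNat 1 rfl le_rfl
  refine bodies_eq (PySem.Set.ofList y) (railR (railMax x) 1) hr.1 acc v ?_
  have h1 := hmax.2 v hv
  have habs : (if v < 0 then -v else v) = |v| := by
    split_ifs with hvneg
    · exact (abs_of_neg hvneg).symm
    · exact (abs_of_nonneg (by omega)).symm
  rw [habs] at h1
  exact lt_of_le_of_lt h1 hr.2
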